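-- pv_equiv track=rewrite | github.com/Sophia0705/StudyingAlgorithm | 프로그래머스/2/388353. 지게차와 크레인/지게차와 크레인.py | solution
-- ===== SOURCE A (Python) =====
-- from collections import deque
--
-- dirs = [(-1, 0), (1, 0), (0, -1), (0, 1)]
--
-- def solution(storage, requests):
--     N = len(storage) + 2
--     M = len(storage[0]) + 2
--
--     # 패딩 포함한 그래프 생성 ('.': 빈공간, 'A'~'Z': 컨테이너, '0': 외부공기, '1': 내부공기)
--     graph = [['0'] * M for _ in range(N)]
--     for i in range(1, N - 1):
--         for j in range(1, M - 1):
--             graph[i][j] = storage[i - 1][j - 1]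
--
--     # 외부공기 확장 BFS ('1'을 만나면 '0'으로 바꾸기)
--     def update():
--         visited = [[False] * M for _ in range(N)]
--         q = deque([(0, 0)])
--         visited[0][0] = True
--         while q:
--             y, x = q.popleft()
--             for dy, dx in dirs:
--                 ny, nx = y + dy, x + dx
--                 if 0 <= ny < N and 0 <= nx < M and not visited[ny][nx]:
--                     if graph[ny][nx] == '0':
--                         q.append((ny, nx))
--                         visited[ny][nx] = True
--                     elif graph[ny][nx] == '1':
--                         graph[ny][nx] = '0'
--                         q.append((ny, nx))
--                         visited[ny][nx] = True
--
--     # 요청 처리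
--     for request in requests:
--         target = request[0]
--
--         if len(request) == 1:  # 지게차 요청
--             remove_list = []
--             for i in range(1, N - 1):
--                 for j in range(1, M - 1):
--                     if graph[i][j] == target:
--                         for di, dj in dirs:
--                             ni, nj = i + di, j + dj
--                             if graph[ni][nj] == '0':  # 외부공기 접촉 여부
--                                 remove_list.append((i, j))
--                                 break
--             for i, j in remove_list:
--                 graph[i][j] = '0'
--             update()
--
--         else:  # 크레인 요청 (2글자)
--             for i in range(1, N - 1):
--                 for j in range(1, M - 1):
--                     if graph[i][j] == target:
--                         graph[i][j] = '1'
--             update()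
--
--     # 최종 컨테이너 개수 세기 ('0', '1'이 아닌 것만 셈)
--     answer = 0
--     for i in range(1, N - 1):
--         for j in range(1, M - 1):
--             if graph[i][j] not in ('0', '1'):
--                 answer += 1
--
--     return answer
-- ===== SOURCE B (Python) =====
-- def solution(storage, requests):
--     H, W = len(storage), len(storage[0])
--     cont = {(i + 1, j + 1): storage[i][j] for i in range(H) for j in range(W)
--             if storage[i][j] != '0' and storage[i][j] != '1'}
--     cells = [(i, j) for i in range(H + 2) for j in range(W + 2)]
--     ext = {c for c in cells
--            if not (1 <= c[0] <= H and 1 <= c[1] <= W) or storage[c[0] - 1][c[1] - 1] == '0'}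
--
--     def nbrs(c):
--         return [(c[0] - 1, c[1]), (c[0] + 1, c[1]), (c[0], c[1] - 1), (c[0], c[1] + 1)]
--
--     def connected(cont):
--         # border-connected air region, by whole-grid relaxation sweeps until stable
--         reach = {(0, 0)}
--         changed = True
--         while changed:
--             changed = False
--             for c in cells:
--                 if c not in reach and c not in cont and any(n in reach for n in nbrs(c)):
--                     reach.add(c)
--                     changed = True
--         return reach
--
--     for r in requests:
--         t = r[0]
--         if len(r) == 1:
--             gone = {c for c, ch in cont.items() if ch == t and any(n in ext for n in nbrs(c))}
--             ext |= gone
--         else: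
--             gone = {c for c, ch in cont.items() if ch == t}
--         cont = {c: ch for c, ch in cont.items() if c not in gone}
--         ext |= connected(cont)
--
--     return len(cont)
-- ===== Notes on version B (the rewrite author's own statement) =====
-- stated objective: alternative
-- what changed: Drops A's padded character grid with '0'/'1' air sentinels and its queue-based BFS: B keeps a container dict plus an external-air set, computes the border-connected air region by whole-grid relaxation sweeps iterated to a fixpoint (no queue, no visited array), and handles each request by rebuilding the dict with a comprehension instead of mutating a grid. …
-- outside the precondition, e.g. on solution(['01AA', '1AAA', 'A01A', '1AA1'], ['1', 'A']): A returns 0, B returns 1; on solution(['10AA', 'AAA1', 'A0AA', 'AAAA'], ['0x', 'A']): A returns 1, B returns 0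
import Mathlib
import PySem

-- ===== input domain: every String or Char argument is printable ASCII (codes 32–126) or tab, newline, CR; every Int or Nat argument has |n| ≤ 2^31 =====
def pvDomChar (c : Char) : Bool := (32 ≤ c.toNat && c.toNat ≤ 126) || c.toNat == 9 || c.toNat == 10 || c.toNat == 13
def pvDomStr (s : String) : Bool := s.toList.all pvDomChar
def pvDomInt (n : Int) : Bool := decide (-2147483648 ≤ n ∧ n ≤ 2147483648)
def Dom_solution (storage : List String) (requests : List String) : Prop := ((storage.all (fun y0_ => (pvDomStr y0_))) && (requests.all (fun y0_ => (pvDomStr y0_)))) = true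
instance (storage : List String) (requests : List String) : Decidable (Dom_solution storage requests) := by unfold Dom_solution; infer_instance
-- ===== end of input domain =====

-- B replaces A's '0'/'1'-sentinel character grid and queue BFS by a container dictionary, an
-- external-air set, and a whole-grid relaxation fixpoint for the border-connected air region
-- (objective: alternative algorithm/data structure; not faster).


-- Shared primitive: storage[i-1][j-1] for padded coordinates (both Pythons index the same way).
def pvStorChar (storage : List String) (i j : Int) : Char :=
  ((storage.getD (i - 1).toNat "").toList).getD (j - 1).toNat '*'

abbrev PvCell := Int × Int

-- the padded box of cells 0..N-1 × 0..M-1 (used by the termination measures of both loops)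
def pvBoxF (N M : Int) : Finset PvCell :=
  ((Finset.range N.toNat) ×ˢ (Finset.range M.toNat)).image (fun p => ((p.1 : Int), (p.2 : Int)))

theorem pvMem_boxF {N M : Int} {c : PvCell} :
    c ∈ pvBoxF N M ↔ 0 ≤ c.1 ∧ c.1 < N ∧ 0 ≤ c.2 ∧ c.2 < M := by
  unfold pvBoxF
  simp only [Finset.mem_image, Finset.mem_product, Finset.mem_range]
  constructor
  · rintro ⟨⟨a, b⟩, ⟨ha, hb⟩, rfl⟩
    dsimp only
    omega
  · rintro ⟨h1, h2, h3, h4⟩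
    refine ⟨(c.1.toNat, c.2.toNat), ⟨by omega, by omega⟩, ?_⟩
    simp only [Prod.ext_iff]
    constructor <;> dsimp only <;> omega

-- ===== PORT A =====

abbrev PvGrid := List (List Char)

def pvDirs : List (Int × Int) := [(-1, 0), (1, 0), (0, -1), (0, 1)]

def pvGetC (g : PvGrid) (i j : Int) : Char := (g.getD i.toNat []).getD j.toNat '*'

def pvSetC (g : PvGrid) (i j : Int) (ch : Char) : PvGrid :=
  g.set i.toNat ((g.getD i.toNat []).set j.toNat ch)

abbrev PvStA := PvGrid × (PvCell → Bool) × List PvCell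

-- one neighbour test of A's BFS: bounds check, then the '0' / '1' branches
def pvVisitA (N M : Int) (s : PvStA) (n : PvCell) : PvStA :=
  if 0 ≤ n.1 ∧ n.1 < N ∧ 0 ≤ n.2 ∧ n.2 < M ∧ ¬ s.2.1 n = true then
    if pvGetC s.1 n.1 n.2 = '0' then
      (s.1, fun c => if c = n then true else s.2.1 c, s.2.2 ++ [n])
    else if pvGetC s.1 n.1 n.2 = '1' then
      (pvSetC s.1 n.1 n.2 '0', fun c => if c = n then true else s.2.1 c, s.2.2 ++ [n])
    else s
  else s

def pvStepA (N M : Int) (g : PvGrid) (vis : PvCell → Bool) (q : List PvCell) (c : PvCell) : PvStA :=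
  pvDirs.foldl (fun s d => pvVisitA N M s (c.1 + d.1, c.2 + d.2)) (g, vis, q)

def pvUnvisA (N M : Int) (vis : PvCell → Bool) : Nat :=
  ((pvBoxF N M).filter (fun c => vis c = false)).card

-- termination facts for A's BFS loop (cited by pvBfsA's decreasing_by)
theorem pvVisitA_prop (N M : Int) (s : PvStA) (n : PvCell) :
    (∀ x, s.2.1 x = true → (pvVisitA N M s n).2.1 x = true) ∧
    (((pvVisitA N M s n).2.1 = s.2.1 ∧ (pvVisitA N M s n).2.2 = s.2.2) ∨
      ∃ m, m ∈ pvBoxF N M ∧ s.2.1 m = false ∧ (pvVisitA N M s n).2.1 m = true) := by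
  unfold pvVisitA
  split
  · rename_i h
    obtain ⟨h1, h2, h3, h4, h5⟩ := h
    split
    · refine ⟨fun x hx => ?_, Or.inr ⟨n, ?_, by simpa using h5, by simp⟩⟩
      · simp only; split <;> simp [hx]
      · exact pvMem_boxF.mpr ⟨h1, h2, h3, h4⟩
    · split
      · refine ⟨fun x hx => ?_, Or.inr ⟨n, ?_, by simpa using h5, by simp⟩⟩
        · simp only; split <;> simp [hx]
        · exact pvMem_boxF.mpr ⟨h1, h2, h3, h4⟩
      · exact ⟨fun x hx => hx, Or.inl ⟨rfl, rfl⟩⟩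
  · exact ⟨fun x hx => hx, Or.inl ⟨rfl, rfl⟩⟩

theorem pvFoldVisitA_prop (N M : Int) (ns : List PvCell) : ∀ s : PvStA,
    (∀ x, s.2.1 x = true → (ns.foldl (pvVisitA N M) s).2.1 x = true) ∧
    (((ns.foldl (pvVisitA N M) s).2.1 = s.2.1 ∧ (ns.foldl (pvVisitA N M) s).2.2 = s.2.2) ∨
      ∃ m, m ∈ pvBoxF N M ∧ s.2.1 m = false ∧ (ns.foldl (pvVisitA N M) s).2.1 m = true) := by
  induction ns with
  | nil => exact fun s => ⟨fun x hx => hx, Or.inl ⟨rfl, rfl⟩⟩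
  | cons n ns ih =>
    intro s
    obtain ⟨m1, h1⟩ := pvVisitA_prop N M s n
    obtain ⟨m2, h2⟩ := ih (pvVisitA N M s n)
    refine ⟨fun x hx => m2 x (m1 x hx), ?_⟩
    rcases h1 with ⟨he1, he2⟩ | ⟨m, hm, hmf, hmt⟩
    · rcases h2 with ⟨hf1, hf2⟩ | ⟨m, hm, hmf, hmt⟩
      · exact Or.inl ⟨by simp [List.foldl_cons, hf1, he1], by simp [List.foldl_cons, hf2, he2]⟩
      · exact Or.inr ⟨m, hm, by rw [he1] at hmf; exact hmf, by simpa [List.foldl_cons] using hmt⟩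
    · exact Or.inr ⟨m, hm, hmf, by simpa [List.foldl_cons] using m2 m hmt⟩

theorem pvStepA_prop (N M : Int) (g : PvGrid) (vis : PvCell → Bool) (q : List PvCell) (c : PvCell) :
    ((pvStepA N M g vis q c).2.1 = vis ∧ (pvStepA N M g vis q c).2.2 = q) ∨
      pvUnvisA N M (pvStepA N M g vis q c).2.1 < pvUnvisA N M vis := by
  unfold pvStepA pvUnvisA
  have h := pvFoldVisitA_prop N M (pvDirs.map (fun d => (c.1 + d.1, c.2 + d.2))) (g, vis, q)
  rw [List.foldl_map] at h
  obtain ⟨hmono, hcase⟩ := h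
  rcases hcase with h | ⟨m, hm, hmf, hmt⟩
  · exact Or.inl h
  · right
    apply Finset.card_lt_card
    constructor
    · intro x hx
      simp only [Finset.mem_filter] at hx ⊢
      refine ⟨hx.1, ?_⟩
      cases hvx : vis x
      · rfl
      · exact absurd (hmono x hvx) (by simp [hx.2])
    · intro hsub
      have h2 := hsub (by simp only [Finset.mem_filter]; exact ⟨hm, hmf⟩)
      simp only [Finset.mem_filter] at h2
      simp [hmt] at h2

def pvBfsA (N M : Int) (g : PvGrid) (vis : PvCell → Bool) (q : List PvCell) :
    PvGrid × (PvCell → Bool) :=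
  match q with
  | [] => (g, vis)
  | c :: rest =>
    let s := pvStepA N M g vis rest c
    pvBfsA N M s.1 s.2.1 s.2.2
termination_by (pvUnvisA N M vis, q.length)
decreasing_by
  rcases pvStepA_prop N M g vis rest c with ⟨h1, h2⟩ | h
  · rw [h1, h2]
    exact Prod.Lex.right _ (by simp)
  · exact Prod.Lex.left _ _ h

def pvUpdateA (N M : Int) (g : PvGrid) : PvGrid × (PvCell → Bool) :=
  pvBfsA N M g (fun c => decide (c = ((0 : Int), (0 : Int)))) [((0 : Int), (0 : Int))]

def solution (storage : List String) (requests : List String) : Int :=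
  let N : Int := (storage.length : Int) + 2
  let M : Int := PySem.Str.len (storage.getD 0 "") + 2
  let g0 : PvGrid := List.replicate N.toNat (List.replicate M.toNat '0')
  let g1 := (PySem.List.pyRange 1 (N - 1) 1).foldl (fun g i =>
      (PySem.List.pyRange 1 (M - 1) 1).foldl (fun g j =>
        pvSetC g i j (pvStorChar storage i j)) g) g0
  let gfin := requests.foldl (fun g r =>
    match r.toList with
    | [] => g
    | t :: rest =>
      if rest.length = 0 then
        let rl := (PySem.List.pyRange 1 (N - 1) 1).foldl (fun acc i =>
            (PySem.List.pyRange 1 (M - 1) 1).foldl (fun acc j =>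
              if pvGetC g i j = t ∧ pvDirs.any (fun d => pvGetC g (i + d.1) (j + d.2) = '0')
              then acc ++ [((i : Int), (j : Int))] else acc) acc) ([] : List PvCell)
        let g2 := rl.foldl (fun h c => pvSetC h c.1 c.2 '0') g
        (pvUpdateA N M g2).1
      else
        let g2 := (PySem.List.pyRange 1 (N - 1) 1).foldl (fun h i =>
            (PySem.List.pyRange 1 (M - 1) 1).foldl (fun h j =>
              if pvGetC h i j = t then pvSetC h i j '1' else h) h) g
        (pvUpdateA N M g2).1) g1
  (PySem.List.pyRange 1 (N - 1) 1).foldl (fun a i =>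
    (PySem.List.pyRange 1 (M - 1) 1).foldl (fun a j =>
      if pvGetC gfin i j ≠ '0' ∧ pvGetC gfin i j ≠ '1' then a + 1 else a) a) (0 : Int)

-- ===== PORT B =====

def pvNbrs (c : PvCell) : List PvCell :=
  [(c.1 - 1, c.2), (c.1 + 1, c.2), (c.1, c.2 - 1), (c.1, c.2 + 1)]

-- the cells list [(i, j) for i in range(H+2) for j in range(W+2)]
def pvCellsB (H W : Int) : List PvCell :=
  (PySem.List.pyRange 0 (H + 2) 1).flatMap (fun i =>
    (PySem.List.pyRange 0 (W + 2) 1).map (fun j => ((i, j) : PvCell)))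

theorem pvMem_cellsB {H W : Int} {c : PvCell} :
    c ∈ pvCellsB H W ↔ 0 ≤ c.1 ∧ c.1 < H + 2 ∧ 0 ≤ c.2 ∧ c.2 < W + 2 := by
  unfold pvCellsB
  simp only [List.mem_flatMap, List.mem_map, PySem.List.mem_pyRange_one]
  constructor
  · rintro ⟨i, hi, j, hj, rfl⟩
    exact ⟨hi.1, hi.2, hj.1, hj.2⟩
  · rintro ⟨h1, h2, h3, h4⟩
    exact ⟨c.1, ⟨h1, h2⟩, c.2, ⟨h3, h4⟩, rfl⟩

abbrev PvStS := PySem.Set PvCell × Bool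

-- one relaxation test of B's sweep: join a free cell to the region if a neighbour is in it
def pvSweepStep (cont : PySem.Dict PvCell Char) (s : PvStS) (c : PvCell) : PvStS :=
  if ¬ PySem.Set.contains s.1 c = true ∧ cont.contains c = false ∧
      (pvNbrs c).any (fun n => PySem.Set.contains s.1 n) = true
  then (PySem.Set.add s.1 c, true) else s

def pvUnreach (H W : Int) (reach : PySem.Set PvCell) : Nat :=
  ((pvBoxF (H + 2) (W + 2)).filter (fun c => ¬ c ∈ reach)).card

-- termination facts for B's sweep loop (cited by pvSweepLoop's decreasing_by)
theorem pvSweepFold_mono (cont : PySem.Dict PvCell Char) (ns : List PvCell) :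
    ∀ s : PvStS, ∀ x, x ∈ s.1 → x ∈ (ns.foldl (pvSweepStep cont) s).1 := by
  induction ns with
  | nil => exact fun s x hx => hx
  | cons n ns ih =>
    intro s x hx
    rw [List.foldl_cons]
    refine ih _ x ?_
    unfold pvSweepStep
    split
    · simpa [PySem.Set.mem_add] using Or.inl hx
    · exact hx

theorem pvSweepFold_grow (N M : Int) (cont : PySem.Dict PvCell Char) (ns : List PvCell) :
    ∀ s : PvStS, (∀ n ∈ ns, n ∈ pvBoxF N M) →
    (ns.foldl (pvSweepStep cont) s = s ∨
      ∃ m, m ∈ pvBoxF N M ∧ m ∉ s.1 ∧ m ∈ (ns.foldl (pvSweepStep cont) s).1) := by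
  induction ns with
  | nil => exact fun s _ => Or.inl rfl
  | cons n ns ih =>
    intro s hns
    have hstep : pvSweepStep cont s n = s ∨ (n ∉ s.1 ∧ n ∈ (pvSweepStep cont s n).1) := by
      unfold pvSweepStep
      split
      · rename_i h
        exact Or.inr ⟨by simpa [PySem.Set.contains_iff] using h.1, by simp [PySem.Set.mem_add]⟩
      · exact Or.inl rfl
    rcases hstep with he | ⟨hnf, hnt⟩
    · rw [List.foldl_cons, he]
      exact ih s (fun x hx => hns x (List.mem_cons_of_mem _ hx))
    · rw [List.foldl_cons]
      exact Or.inr ⟨n, hns n (List.mem_cons_self ..), hnf,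
        pvSweepFold_mono cont ns _ n hnt⟩

theorem pvSweepPass_prop (H W : Int) (cont : PySem.Dict PvCell Char) (reach : PySem.Set PvCell)
    (h : ((pvCellsB H W).foldl (pvSweepStep cont) (reach, false)).2 = true) :
    pvUnreach H W ((pvCellsB H W).foldl (pvSweepStep cont) (reach, false)).1
      < pvUnreach H W reach := by
  have hc := pvSweepFold_grow (H + 2) (W + 2) cont (pvCellsB H W) (reach, false)
    (fun n hn => pvMem_boxF.mpr (pvMem_cellsB.mp hn))
  rcases hc with he | ⟨m, hmb, hmf, hmt⟩
  · rw [he] at h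
    simp at h
  · unfold pvUnreach
    apply Finset.card_lt_card
    constructor
    · intro x hx
      simp only [Finset.mem_filter] at hx ⊢
      exact ⟨hx.1, fun hb => hx.2 (pvSweepFold_mono cont (pvCellsB H W) (reach, false) x hb)⟩
    · intro hsub
      have := hsub (by simp only [Finset.mem_filter]; exact ⟨hmb, hmf⟩)
      simp only [Finset.mem_filter] at this
      exact this.2 hmt

-- while changed: one whole-grid pass; repeat until a pass adds nothing
def pvSweepLoop (H W : Int) (cont : PySem.Dict PvCell Char) (reach : PySem.Set PvCell) :
    PySem.Set PvCell :=
  let s := (pvCellsB H W).foldl (pvSweepStep cont) (reach, false)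
  if s.2 = true then pvSweepLoop H W cont s.1 else s.1
termination_by pvUnreach H W reach
decreasing_by exact pvSweepPass_prop H W cont reach (by assumption)

def pvSweep (H W : Int) (cont : PySem.Dict PvCell Char) : PySem.Set PvCell :=
  pvSweepLoop H W cont (PySem.Set.add PySem.Set.empty ((0 : Int), (0 : Int)))

def solution_alt (storage : List String) (requests : List String) : Int :=
  let H : Int := (storage.length : Int)
  let W : Int := PySem.Str.len (storage.getD 0 "")
  let cont0 : PySem.Dict PvCell Char :=
    ((PySem.List.pyRange 0 H 1).flatMap (fun i =>
        (PySem.List.pyRange 0 W 1).map (fun j => ((i, j) : PvCell)))).foldl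
      (fun d c =>
        if pvStorChar storage (c.1 + 1) (c.2 + 1) ≠ '0' ∧
            pvStorChar storage (c.1 + 1) (c.2 + 1) ≠ '1'
        then d.insert (c.1 + 1, c.2 + 1) (pvStorChar storage (c.1 + 1) (c.2 + 1)) else d)
      PySem.Dict.empty
  let ext0 : PySem.Set PvCell :=
    (pvCellsB H W).foldl
      (fun s c =>
        if ¬ (1 ≤ c.1 ∧ c.1 ≤ H ∧ 1 ≤ c.2 ∧ c.2 ≤ W) ∨ pvStorChar storage c.1 c.2 = '0'
        then PySem.Set.add s c else s)
      PySem.Set.empty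
  let fin := requests.foldl (fun s r =>
    match r.toList with
    | [] => s
    | t :: rest =>
      if rest.length = 0 then
        let gone := PySem.Set.ofList ((s.1.items.filter (fun p =>
          p.2 == t && (pvNbrs p.1).any (fun n => PySem.Set.contains s.2 n))).map (·.1))
        let ext1 := PySem.Set.update s.2 gone
        let cont' := (s.1.items.filter (fun p => !(PySem.Set.contains gone p.1))).foldl
          (fun d p => d.insert p.1 p.2) PySem.Dict.empty
        (cont', PySem.Set.update ext1 (pvSweep H W cont'))
      else
        let gone := PySem.Set.ofList ((s.1.items.filter (fun p => p.2 == t)).map (·.1))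
        let cont' := (s.1.items.filter (fun p => !(PySem.Set.contains gone p.1))).foldl
          (fun d p => d.insert p.1 p.2) PySem.Dict.empty
        (cont', PySem.Set.update s.2 (pvSweep H W cont'))) (cont0, ext0)
  (fin.1.size : Int)

-- ===== PRECONDITION & SPEC =====
-- Pre_ excludes (a) inputs where the Python A raises: empty storage, a later row shorter than the
-- first row (IndexError), or an empty request string (IndexError); and (b) inputs where the storage
-- contains A's internal air-encoding character '0' AND some request that targets the sentinels
-- destructively (a one-letter request '1', or a multi-letter request starting with '0') is followed
-- by a later one-letter (forklift) request: there A has re-encoded AIR cells and a later forklift's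
-- exposure test can observe it — an artefact of the sentinel encoding, not container semantics.
-- Sentinel requests followed only by multi-letter (crane) requests are provably harmless, as is
-- anything over a '0'-free storage, so those inputs stay inside Pre_.
def Pre_solution (storage : List String) (requests : List String) : Prop :=
  storage ≠ [] ∧
  (∀ s ∈ storage, (storage.headD "").toList.length ≤ s.toList.length) ∧
  (∀ r ∈ requests, r.toList ≠ []) ∧
  ((storage.all (fun s => s.toList.all (fun ch => ch != '0'))) = true ∨
   List.Pairwise (fun a b => ((a.toList.length = 1 ∧ a.toList.headD ' ' = '1') ∨
     (a.toList.length ≠ 1 ∧ a.toList.headD ' ' = '0')) → b.toList.length ≠ 1) requests)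

instance (storage : List String) (requests : List String) : Decidable (Pre_solution storage requests) := by
  unfold Pre_solution; infer_instance

def pvWitness_solution : List String × List String := (["AB", "BA"], ["A", "BB"])

def Spec_solution (storage : List String) (requests : List String) (out : Int) : Prop :=
  out = solution_alt storage requests
instance (storage : List String) (requests : List String) (out : Int) : Decidable (Spec_solution storage requests out) := by
  unfold Spec_solution; infer_instance

-- ===== CLAIM (what is proved, stated in full; the proofs are below) =====
def Claim_equal_solution : Prop := ∀ (storage : List String) (requests : List String), Dom_solution storage requests → Pre_solution storage requests → Spec_solution storage requests (solution storage requests)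

-- ===== LEMMAS AND PROOFS =====

-- abstract views of the two states
abbrev pvInB (H W : Int) (c : PvCell) : Prop := 0 ≤ c.1 ∧ c.1 < H + 2 ∧ 0 ≤ c.2 ∧ c.2 < W + 2
abbrev pvIntr (H W : Int) (c : PvCell) : Prop := 1 ≤ c.1 ∧ c.1 ≤ H ∧ 1 ≤ c.2 ∧ c.2 ≤ W
def pvShape (H W : Int) (g : PvGrid) : Prop :=
  g.length = (H + 2).toNat ∧ ∀ row ∈ g, row.length = (W + 2).toNat

def pvCellsR (a b cc d : Int) : List PvCell :=
  (PySem.List.pyRange a b 1).flatMap (fun i => (PySem.List.pyRange cc d 1).map (fun j => (i, j)))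

theorem pvMem_cellsR {a b cc d : Int} {c : PvCell} :
    c ∈ pvCellsR a b cc d ↔ (a ≤ c.1 ∧ c.1 < b ∧ cc ≤ c.2 ∧ c.2 < d) := by
  unfold pvCellsR
  simp only [List.mem_flatMap, List.mem_map, PySem.List.mem_pyRange_one]
  constructor
  · rintro ⟨i, hi, j, hj, rfl⟩
    exact ⟨hi.1, hi.2, hj.1, hj.2⟩
  · rintro ⟨h1, h2, h3, h4⟩
    exact ⟨c.1, ⟨h1, h2⟩, c.2, ⟨h3, h4⟩, rfl⟩

theorem pvNodup_cellsR (a b cc d : Int) : (pvCellsR a b cc d).Nodup := by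
  unfold pvCellsR
  have h : ∀ l1 : List Int, l1.Nodup →
      (l1.flatMap (fun i => (PySem.List.pyRange cc d 1).map (fun j => ((i : Int), j)))).Nodup := by
    intro l1 hl1
    induction l1 with
    | nil => simp
    | cons i l1 ih =>
      rw [List.flatMap_cons]
      rw [List.nodup_cons] at hl1
      refine (List.nodup_append ..).mpr ⟨?_, ih hl1.2, ?_⟩
      · exact (PySem.List.nodup_pyRange_one ..).map (fun x y hxy => by
          simpa using congrArg Prod.snd hxy)
      · intro x hx1 y hy2 hxy
        obtain ⟨j, hj, hxe⟩ := List.mem_map.mp hx1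
        obtain ⟨i2, hi2, hm⟩ := List.mem_flatMap.mp hy2
        obtain ⟨j2, hj2, heq⟩ := List.mem_map.mp hm
        apply hl1.1
        have h1 := congrArg Prod.fst heq
        have h2 := congrArg Prod.fst hxe
        rw [hxy] at h2
        simp only at h1 h2
        rwa [show i2 = i by omega] at hi2
  exact h _ (PySem.List.nodup_pyRange_one ..)

theorem pvCellsR_def (a b cc d : Int) :
    (PySem.List.pyRange a b 1).flatMap (fun i => (PySem.List.pyRange cc d 1).map (fun j => ((i : Int), j)))
      = pvCellsR a b cc d := rfl

theorem pvNestedFoldl {σ : Type} (l1 l2 : List Int) (f : σ → PvCell → σ) (init : σ) :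
    l1.foldl (fun s i => l2.foldl (fun s j => f s (i, j)) s) init
      = (l1.flatMap (fun i => l2.map (fun j => ((i : Int), j)))).foldl f init := by
  induction l1 generalizing init with
  | nil => rfl
  | cons i l1 ih => simp [List.foldl_append, List.foldl_map, ih]

theorem pvFoldl_ite_filter {σ α : Type} (P : α → Prop) [DecidablePred P] (f : σ → α → σ)
    (l : List α) : ∀ s : σ, l.foldl (fun s x => if P x then f s x else s) s
      = (l.filter (fun x => decide (P x))).foldl f s := by
  induction l with
  | nil => intro s; rfl
  | cons x l ih =>
    intro s
    rw [List.foldl_cons, List.filter_cons]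
    by_cases h : P x
    · simp only [h, if_pos, decide_true, List.foldl_cons]
      exact ih _
    · simp only [h, decide_false, if_false]
      exact ih s

-- the state invariant between requests
structure PvInv (H W : Int) (g : PvGrid) (cont : PySem.Dict PvCell Char)
    (zero : PySem.Set PvCell) : Prop where
  shape : pvShape H W g
  ring : ∀ c : PvCell, pvInB H W c → ¬ pvIntr H W c → pvGetC g c.1 c.2 = '0'
  zeroI : ∀ c : PvCell, pvInB H W c → (pvGetC g c.1 c.2 = '0' ↔ c ∈ zero)
  contI : ∀ c : PvCell, pvInB H W c → cont.get? c =
    (if pvGetC g c.1 c.2 ≠ '0' ∧ pvGetC g c.1 c.2 ≠ '1' then some (pvGetC g c.1 c.2) else none)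
  keysInt : ∀ p ∈ cont.items, pvIntr H W p.1
  keysNd : cont.keys.Nodup

-- the lockstep invariant inside A's BFS loop
structure PvBInv (H W : Int) (g : PvGrid) (cont : PySem.Dict PvCell Char)
    (zero : PySem.Set PvCell) (vis : PvCell → Bool) (seen : PySem.Set PvCell) : Prop where
  shape : pvShape H W g
  ring : ∀ c : PvCell, pvInB H W c → ¬ pvIntr H W c → pvGetC g c.1 c.2 = '0'
  visSeen : ∀ c : PvCell, vis c = true ↔ c ∈ seen
  zeroVis : ∀ c : PvCell, pvInB H W c →
    (pvGetC g c.1 c.2 = '0' ↔ (c ∈ zero ∨ vis c = true))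
  contI : ∀ c : PvCell, pvInB H W c → cont.get? c =
    (if pvGetC g c.1 c.2 ≠ '0' ∧ pvGetC g c.1 c.2 ≠ '1' then some (pvGetC g c.1 c.2) else none)

-- the weaker invariant once the air encoding may have diverged: only the containers are tracked
structure PvInv2 (H W : Int) (g : PvGrid) (cont : PySem.Dict PvCell Char) : Prop where
  shape : pvShape H W g
  ring : ∀ c : PvCell, pvInB H W c → ¬ pvIntr H W c → pvGetC g c.1 c.2 = '0'
  contI : ∀ c : PvCell, pvInB H W c → cont.get? c =
    (if pvGetC g c.1 c.2 ≠ '0' ∧ pvGetC g c.1 c.2 ≠ '1' then some (pvGetC g c.1 c.2) else none)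
  keysInt : ∀ p ∈ cont.items, pvIntr H W p.1
  keysNd : cont.keys.Nodup

theorem pvInv_to2 {H W : Int} {g : PvGrid} {cont : PySem.Dict PvCell Char}
    {zero : PySem.Set PvCell} (inv : PvInv H W g cont zero) : PvInv2 H W g cont :=
  ⟨inv.shape, inv.ring, inv.contI, inv.keysInt, inv.keysNd⟩

-- grid primitives
theorem pvShape_setC {H W : Int} {g : PvGrid} (hs : pvShape H W g) (i j : Int) (ch : Char) :
    pvShape H W (pvSetC g i j ch) := by
  obtain ⟨hL, hR⟩ := hs
  unfold pvSetC
  by_cases hi : i.toNat < g.length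
  · refine ⟨by rw [List.length_set]; exact hL, ?_⟩
    intro row hrow
    rcases List.mem_or_eq_of_mem_set hrow with h | h
    · exact hR _ h
    · subst h
      rw [List.length_set, List.getD_eq_getElem g [] hi]
      exact hR _ (List.getElem_mem hi)
  · rw [List.set_eq_of_length_le (by omega)]
    exact ⟨hL, hR⟩

theorem pvGetC_setC {H W : Int} {g : PvGrid} (hs : pvShape H W g) {c : PvCell}
    (hc : pvInB H W c) {d : PvCell} (hd : pvInB H W d) (ch : Char) :
    pvGetC (pvSetC g c.1 c.2 ch) d.1 d.2 = if d = c then ch else pvGetC g d.1 d.2 := by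
  obtain ⟨hL, hR⟩ := hs
  obtain ⟨hc1, hc2, hc3, hc4⟩ := hc
  obtain ⟨hd1, hd2, hd3, hd4⟩ := hd
  have hcl : c.1.toNat < g.length := by omega
  have hdl : d.1.toNat < g.length := by omega
  have hrowlen : (g.getD c.1.toNat []).length = (W + 2).toNat := by
    rw [List.getD_eq_getElem g [] hcl]
    exact hR _ (List.getElem_mem hcl)
  have hc2l : c.2.toNat < (g.getD c.1.toNat []).length := by omega
  unfold pvGetC pvSetC
  by_cases h1 : d.1.toNat = c.1.toNat
  · rw [h1, List.getD_eq_getElem _ [] (by rw [List.length_set]; exact hcl),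
      List.getElem_set_self (by rw [List.length_set]; exact hcl)]
    by_cases h2 : d.2.toNat = c.2.toNat
    · have hdc : d = c := Prod.ext (by omega) (by omega)
      rw [if_pos hdc, h2, List.getD_eq_getElem _ '*' (by rw [List.length_set]; exact hc2l),
        List.getElem_set_self (by rw [List.length_set]; exact hc2l)]
    · have hdc : d ≠ c := fun h => h2 (by rw [h])
      have hd2l : d.2.toNat < (g.getD c.1.toNat []).length := by omega
      rw [if_neg hdc, List.getD_eq_getElem _ '*' (by rw [List.length_set]; exact hd2l),
        List.getElem_set_ne (fun h => h2 h.symm),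
        List.getD_eq_getElem _ '*' hd2l]
  · have hdc : d ≠ c := fun h => h1 (by rw [h])
    rw [if_neg hdc, List.getD_eq_getElem _ [] (by rw [List.length_set]; exact hdl),
      List.getElem_set_ne (fun h => h1 h.symm),
      List.getD_eq_getElem g [] hdl]

theorem pvShape_foldl_setC {H W : Int} (cells : List PvCell) (f : PvCell → Char) :
    ∀ g : PvGrid, pvShape H W g →
    pvShape H W (cells.foldl (fun h c => pvSetC h c.1 c.2 (f c)) g) := by
  induction cells with
  | nil => exact fun g hg => hg
  | cons c cs ih => exact fun g hg => ih _ (pvShape_setC hg _ _ _)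

theorem pvGetC_foldl_setC {H W : Int} (cells : List PvCell) (f : PvCell → Char) :
    ∀ g : PvGrid, pvShape H W g → (∀ c ∈ cells, pvInB H W c) → ∀ d : PvCell, pvInB H W d →
    pvGetC (cells.foldl (fun h c => pvSetC h c.1 c.2 (f c)) g) d.1 d.2
      = if d ∈ cells then f d else pvGetC g d.1 d.2 := by
  induction cells with
  | nil => intro g hg hall d hd; simp
  | cons c cs ih =>
    intro g hg hall d hd
    have hc := hall c (by simp)
    rw [List.foldl_cons, ih _ (pvShape_setC hg _ _ _) (fun x hx => hall x (by simp [hx])) d hd]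
    by_cases h1 : d ∈ cs
    · simp [h1]
    · rw [if_neg h1, pvGetC_setC hg hc hd (f c)]
      by_cases h2 : d = c
      · simp [h2]
      · simp [h1, h2]

theorem pvGetC_crane {H W : Int} (cells : List PvCell) (t : Char) :
    ∀ g : PvGrid, pvShape H W g → (∀ c ∈ cells, pvInB H W c) → ∀ d : PvCell, pvInB H W d →
    pvGetC (cells.foldl (fun h c => if pvGetC h c.1 c.2 = t then pvSetC h c.1 c.2 '1' else h) g) d.1 d.2
      = if d ∈ cells ∧ pvGetC g d.1 d.2 = t then '1' else pvGetC g d.1 d.2 := by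
  induction cells with
  | nil => intro g hg hall d hd; simp
  | cons c cs ih =>
    intro g hg hall d hd
    have hc := hall c (by simp)
    rw [List.foldl_cons]
    have hshape1 : pvShape H W (if pvGetC g c.1 c.2 = t then pvSetC g c.1 c.2 '1' else g) := by
      split
      · exact pvShape_setC hg _ _ _
      · exact hg
    have hget1 : ∀ e : PvCell, pvInB H W e →
        pvGetC (if pvGetC g c.1 c.2 = t then pvSetC g c.1 c.2 '1' else g) e.1 e.2
          = if e = c ∧ pvGetC g c.1 c.2 = t then '1' else pvGetC g e.1 e.2 := by
      intro e he
      split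
      · rename_i hcond
        rw [pvGetC_setC hg hc he '1']
        by_cases h : e = c <;> simp [h, hcond]
      · rename_i hcond
        by_cases h : e = c <;> simp [h, hcond]
    rw [ih _ hshape1 (fun x hx => hall x (by simp [hx])) d hd, hget1 d hd]
    by_cases h2 : d = c
    · subst h2
      by_cases h3 : pvGetC g d.1 d.2 = t
      · simp only [h3, List.mem_cons, true_or, and_self, if_pos]
        split <;> rfl
      · simp [h3]
    · by_cases h1 : d ∈ cs <;> simp [h1, h2]

theorem pvShape_crane {H W : Int} (cells : List PvCell) (t : Char) :
    ∀ g : PvGrid, pvShape H W g →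
    pvShape H W (cells.foldl (fun h c => if pvGetC h c.1 c.2 = t then pvSetC h c.1 c.2 '1' else h) g) := by
  induction cells with
  | nil => exact fun g hg => hg
  | cons c cs ih =>
    intro g hg
    refine ih _ ?_
    dsimp only [List.foldl_cons]
    split
    · exact pvShape_setC hg _ _ _
    · exact hg

-- B's dict rebuild (comprehension = insert-fold from empty) characterized
theorem pvRebuild_items (cont : PySem.Dict PvCell Char) (gone : PySem.Set PvCell)
    (h : cont.keys.Nodup) :
    ((cont.items.filter (fun p => !(PySem.Set.contains gone p.1))).foldl
      (fun d p => d.insert p.1 p.2) PySem.Dict.empty).items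
      = cont.items.filter (fun p => !(PySem.Set.contains gone p.1)) := by
  have hnd : ((cont.items.filter (fun p => !(PySem.Set.contains gone p.1))).map Prod.fst).Nodup := by
    have hsub : ((cont.items.filter (fun p => !(PySem.Set.contains gone p.1))).map Prod.fst).Sublist
        (cont.items.map Prod.fst) := List.Sublist.map _ List.filter_sublist
    exact hsub.nodup (by simpa only [PySem.Dict.keys] using h)
  have := PySem.Dict.items_foldl_insert_fresh
    (cont.items.filter (fun p => !(PySem.Set.contains gone p.1))) Prod.fst Prod.snd
    PySem.Dict.empty (fun a _ => PySem.Dict.contains_empty _) hnd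
  simpa using this

theorem pvRebuild_keys_nodup (cont : PySem.Dict PvCell Char) (gone : PySem.Set PvCell)
    (h : cont.keys.Nodup) :
    ((cont.items.filter (fun p => !(PySem.Set.contains gone p.1))).foldl
      (fun d p => d.insert p.1 p.2) PySem.Dict.empty).keys.Nodup := by
  simp only [PySem.Dict.keys, pvRebuild_items cont gone h]
  have hsub : ((cont.items.filter (fun p => !(PySem.Set.contains gone p.1))).map Prod.fst).Sublist
      (cont.items.map Prod.fst) := List.Sublist.map _ List.filter_sublist
  have := hsub.nodup (by simpa only [PySem.Dict.keys] using h)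
  simpa using this

theorem pvRebuild_get? (cont : PySem.Dict PvCell Char) (gone : PySem.Set PvCell)
    (h : cont.keys.Nodup) (c : PvCell) :
    ((cont.items.filter (fun p => !(PySem.Set.contains gone p.1))).foldl
      (fun d p => d.insert p.1 p.2) PySem.Dict.empty).get? c
      = if c ∈ gone then none else cont.get? c := by
  have hitems := pvRebuild_items cont gone h
  have hknd := pvRebuild_keys_nodup cont gone h
  by_cases hg : c ∈ gone
  · rw [if_pos hg, PySem.Dict.get?_eq_none_iff_not_mem_keys]
    simp only [PySem.Dict.keys, hitems, List.mem_map]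
    rintro ⟨p, hp, rfl⟩
    have hpf := (List.mem_filter.mp hp).2
    have hct : PySem.Set.contains gone p.1 = true := (PySem.Set.contains_iff _ _).mpr hg
    rw [hct] at hpf
    exact absurd hpf (by decide)
  · rw [if_neg hg]
    cases hq : cont.get? c with
    | none =>
      rw [PySem.Dict.get?_eq_none_iff_not_mem_keys]
      have hcn := (PySem.Dict.get?_eq_none_iff_not_mem_keys cont c).mp hq
      simp only [PySem.Dict.keys, hitems, List.mem_map]
      rintro ⟨p, hp, rfl⟩
      exact hcn (by
        simp only [PySem.Dict.keys, List.mem_map]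
        exact ⟨p, (List.mem_filter.mp hp).1, rfl⟩)
    | some v =>
      have hmem := PySem.Dict.mem_items_of_get?_eq_some cont hq
      have hcf : PySem.Set.contains gone c = false := by
        cases hx : PySem.Set.contains gone c
        · rfl
        · exact absurd ((PySem.Set.contains_iff _ _).mp hx) hg
      refine PySem.Dict.get?_of_mem_items _ ?_ hknd
      rw [hitems, List.mem_filter]
      exact ⟨hmem, by rw [hcf]; rfl⟩

theorem pvRebuild_nil (cont : PySem.Dict PvCell Char) (h : cont.keys.Nodup) :
    ((cont.items.filter (fun p => !(PySem.Set.contains ([] : PySem.Set PvCell) p.1))).foldl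
      (fun d p => d.insert p.1 p.2) PySem.Dict.empty) = cont := by
  apply PySem.Dict.ext
  rw [pvRebuild_items cont [] h]
  have : ∀ p : PvCell × Char, (!(PySem.Set.contains ([] : PySem.Set PvCell) p.1)) = true := by
    intro p
    simp [PySem.Set.contains]
  rw [List.filter_eq_self.mpr (fun p _ => this p)]

-- proof-only queue BFS (mirrors A's update on the abstract state; used to characterize A's flood)
abbrev PvStB := PySem.Set PvCell × List PvCell

def pvVisitB (H W : Int) (cont : PySem.Dict PvCell Char) (s : PvStB) (n : PvCell) : PvStB :=
  if 0 ≤ n.1 ∧ n.1 < H + 2 ∧ 0 ≤ n.2 ∧ n.2 < W + 2 ∧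
      ¬ PySem.Set.contains s.1 n = true ∧ ¬ cont.contains n = true
  then (PySem.Set.add s.1 n, s.2 ++ [n]) else s

def pvUnvisB (H W : Int) (seen : PySem.Set PvCell) : Nat :=
  ((pvBoxF (H + 2) (W + 2)).filter (fun c => ¬ c ∈ seen)).card

theorem pvFoldVisitB_prop (H W : Int) (cont : PySem.Dict PvCell Char) (ns : List PvCell) :
    ∀ s : PvStB,
    (∀ x, x ∈ s.1 → x ∈ (ns.foldl (pvVisitB H W cont) s).1) ∧
    (((ns.foldl (pvVisitB H W cont) s).1 = s.1 ∧ (ns.foldl (pvVisitB H W cont) s).2 = s.2) ∨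
      ∃ m, m ∈ pvBoxF (H + 2) (W + 2) ∧ ¬ m ∈ s.1 ∧ m ∈ (ns.foldl (pvVisitB H W cont) s).1) := by
  induction ns with
  | nil => exact fun s => ⟨fun x hx => hx, Or.inl ⟨rfl, rfl⟩⟩
  | cons n ns ih =>
    intro s
    have hstep : (∀ x, x ∈ s.1 → x ∈ (pvVisitB H W cont s n).1) ∧
        (((pvVisitB H W cont s n).1 = s.1 ∧ (pvVisitB H W cont s n).2 = s.2) ∨
          ∃ m, m ∈ pvBoxF (H + 2) (W + 2) ∧ ¬ m ∈ s.1 ∧ m ∈ (pvVisitB H W cont s n).1) := by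
      unfold pvVisitB
      split
      · rename_i h
        obtain ⟨h1, h2, h3, h4, h5, h6⟩ := h
        refine ⟨fun x hx => ?_, Or.inr ⟨n, ?_, ?_, ?_⟩⟩
        · simp only [PySem.Set.mem_add]; exact Or.inl hx
        · exact pvMem_boxF.mpr ⟨h1, h2, h3, h4⟩
        · simpa [PySem.Set.contains_iff] using h5
        · simp [PySem.Set.mem_add]
      · exact ⟨fun x hx => hx, Or.inl ⟨rfl, rfl⟩⟩
    obtain ⟨m1, h1⟩ := hstep
    obtain ⟨m2, h2⟩ := ih (pvVisitB H W cont s n)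
    refine ⟨fun x hx => m2 x (m1 x hx), ?_⟩
    rcases h1 with ⟨he1, he2⟩ | ⟨m, hm, hmf, hmt⟩
    · rcases h2 with ⟨hf1, hf2⟩ | ⟨m, hm, hmf, hmt⟩
      · exact Or.inl ⟨by simp [List.foldl_cons, hf1, he1], by simp [List.foldl_cons, hf2, he2]⟩
      · exact Or.inr ⟨m, hm, by rw [he1] at hmf; exact hmf, by simpa [List.foldl_cons] using hmt⟩
    · exact Or.inr ⟨m, hm, hmf, by simpa [List.foldl_cons] using m2 m hmt⟩

theorem pvStepB_prop (H W : Int) (cont : PySem.Dict PvCell Char) (seen : PySem.Set PvCell)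
    (q : List PvCell) (c : PvCell) :
    (((pvNbrs c).foldl (pvVisitB H W cont) (seen, q)).1 = seen ∧
        ((pvNbrs c).foldl (pvVisitB H W cont) (seen, q)).2 = q) ∨
      pvUnvisB H W ((pvNbrs c).foldl (pvVisitB H W cont) (seen, q)).1 < pvUnvisB H W seen := by
  obtain ⟨hmono, hcase⟩ := pvFoldVisitB_prop H W cont (pvNbrs c) (seen, q)
  rcases hcase with h | ⟨m, hm, hmf, hmt⟩
  · exact Or.inl h
  · right
    apply Finset.card_lt_card
    constructor
    · intro x hx
      simp only [Finset.mem_filter] at hx ⊢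
      refine ⟨hx.1, fun hb => hx.2 (hmono x hb)⟩
    · intro hsub
      have := hsub (by simp only [Finset.mem_filter]; exact ⟨hm, hmf⟩)
      simp only [Finset.mem_filter] at this
      exact this.2 hmt

def pvBfsB (H W : Int) (cont : PySem.Dict PvCell Char) (seen : PySem.Set PvCell)
    (q : List PvCell) : PySem.Set PvCell :=
  match q with
  | [] => seen
  | c :: rest =>
    let s := (pvNbrs c).foldl (pvVisitB H W cont) (seen, rest)
    pvBfsB H W cont s.1 s.2
termination_by (pvUnvisB H W seen, q.length)
decreasing_by
  rcases pvStepB_prop H W cont seen rest c with ⟨h1, h2⟩ | h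
  · rw [h1, h2]
    exact Prod.Lex.right _ (by simp)
  · exact Prod.Lex.left _ _ h

-- the lockstep simulation of A's BFS against pvBfsB
theorem pvVisit_sim {H W : Int} {cont : PySem.Dict PvCell Char} {zero : PySem.Set PvCell}
    {g : PvGrid} {vis : PvCell → Bool} {q : List PvCell} {seen : PySem.Set PvCell}
    (inv : PvBInv H W g cont zero vis seen) (n : PvCell) :
    PvBInv H W (pvVisitA (H + 2) (W + 2) (g, vis, q) n).1 cont zero
        (pvVisitA (H + 2) (W + 2) (g, vis, q) n).2.1
        (pvVisitB H W cont (seen, q) n).1 ∧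
      (pvVisitA (H + 2) (W + 2) (g, vis, q) n).2.2 = (pvVisitB H W cont (seen, q) n).2 := by
  unfold pvVisitA pvVisitB
  dsimp only
  by_cases hb : 0 ≤ n.1 ∧ n.1 < H + 2 ∧ 0 ≤ n.2 ∧ n.2 < W + 2
  case neg =>
    rw [if_neg (by tauto), if_neg (by tauto)]
    exact ⟨inv, rfl⟩
  case pos =>
    obtain ⟨hb1, hb2, hb3, hb4⟩ := hb
    have hnb : pvInB H W n := ⟨hb1, hb2, hb3, hb4⟩
    by_cases hv : vis n = true
    · have hcs : PySem.Set.contains seen n = true := by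
        rw [PySem.Set.contains_iff]; exact (inv.visSeen n).mp hv
      rw [if_neg (fun h => h.2.2.2.2 hv), if_neg (fun h => h.2.2.2.2.1 hcs)]
      exact ⟨inv, rfl⟩
    · have hseen : ¬ n ∈ seen := fun h => hv ((inv.visSeen n).mpr h)
      have hcseen : ¬ PySem.Set.contains seen n = true := by
        rw [PySem.Set.contains_iff]; exact hseen
      rw [if_pos ⟨hb1, hb2, hb3, hb4, hv⟩]
      have hcont := inv.contI n hnb
      have hVS : ∀ c : PvCell, (if c = n then true else vis c) = true ↔ c ∈ PySem.Set.add seen n := by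
        intro c
        by_cases hc : c = n
        · simp [hc, PySem.Set.mem_add]
        · simp [hc, PySem.Set.mem_add, inv.visSeen c]
      by_cases h0 : pvGetC g n.1 n.2 = '0'
      · rw [if_pos h0]
        have hnc : ¬ cont.contains n = true := by
          rw [PySem.Dict.contains_eq_isSome_get?, hcont]
          simp [h0]
        rw [if_pos ⟨hb1, hb2, hb3, hb4, hcseen, hnc⟩]
        refine ⟨⟨inv.shape, inv.ring, hVS, ?_, inv.contI⟩, rfl⟩
        intro c hcin
        by_cases hc : c = n
        · subst hc; simp [h0]
        · simp only [hc, if_false]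
          exact inv.zeroVis c hcin
      · rw [if_neg h0]
        by_cases h1 : pvGetC g n.1 n.2 = '1'
        · rw [if_pos h1]
          have hnc : ¬ cont.contains n = true := by
            rw [PySem.Dict.contains_eq_isSome_get?, hcont]
            simp [h0, h1]
          rw [if_pos ⟨hb1, hb2, hb3, hb4, hcseen, hnc⟩]
          have hget' : ∀ e : PvCell, pvInB H W e →
              pvGetC (pvSetC g n.1 n.2 '0') e.1 e.2 = if e = n then '0' else pvGetC g e.1 e.2 :=
            fun e he => pvGetC_setC inv.shape hnb he '0'
          refine ⟨⟨pvShape_setC inv.shape n.1 n.2 '0', ?_, hVS, ?_, ?_⟩, rfl⟩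
          · intro c hcin hcint
            rw [hget' c hcin]
            split
            · rfl
            · exact inv.ring c hcin hcint
          · intro c hcin
            rw [hget' c hcin]
            by_cases hc : c = n
            · simp [hc]
            · simp only [hc, if_false]
              exact inv.zeroVis c hcin
          · intro c hcin
            rw [hget' c hcin]
            by_cases hc : c = n
            · subst hc
              rw [hcont]
              simp [h0, h1]
            · simp only [hc, if_false]
              exact inv.contI c hcin
        · rw [if_neg h1]
          have hc : cont.contains n = true := by
            rw [PySem.Dict.contains_eq_isSome_get?, hcont]
            simp [h0, h1]
          rw [if_neg (fun hcon => hcon.2.2.2.2.2 hc)]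
          exact ⟨inv, rfl⟩

theorem pvFold_sim {H W : Int} {cont : PySem.Dict PvCell Char} {zero : PySem.Set PvCell}
    (ns : List PvCell) :
    ∀ (g : PvGrid) (vis : PvCell → Bool) (q : List PvCell) (seen : PySem.Set PvCell),
    PvBInv H W g cont zero vis seen →
    PvBInv H W (ns.foldl (pvVisitA (H + 2) (W + 2)) (g, vis, q)).1 cont zero
        (ns.foldl (pvVisitA (H + 2) (W + 2)) (g, vis, q)).2.1
        (ns.foldl (pvVisitB H W cont) (seen, q)).1 ∧
      (ns.foldl (pvVisitA (H + 2) (W + 2)) (g, vis, q)).2.2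
        = (ns.foldl (pvVisitB H W cont) (seen, q)).2 := by
  induction ns with
  | nil => exact fun g vis q seen inv => ⟨inv, rfl⟩
  | cons n ns ih =>
    intro g vis q seen inv
    obtain ⟨inv1, hq⟩ := pvVisit_sim inv n
    have hB : pvVisitB H W cont (seen, q) n
        = ((pvVisitB H W cont (seen, q) n).1, (pvVisitA (H + 2) (W + 2) (g, vis, q) n).2.2) := by
      rw [hq]
    have hA : pvVisitA (H + 2) (W + 2) (g, vis, q) n
        = ((pvVisitA (H + 2) (W + 2) (g, vis, q) n).1,
           (pvVisitA (H + 2) (W + 2) (g, vis, q) n).2.1,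
           (pvVisitA (H + 2) (W + 2) (g, vis, q) n).2.2) := rfl
    rw [List.foldl_cons, List.foldl_cons, hB, hA]
    exact ih _ _ _ _ inv1

theorem pvNbrs_eq_map (c : PvCell) :
    pvNbrs c = pvDirs.map (fun d => (c.1 + d.1, c.2 + d.2)) := by
  simp [pvNbrs, pvDirs, sub_eq_add_neg]

theorem pvBfs_sim {H W : Int} {cont : PySem.Dict PvCell Char} {zero : PySem.Set PvCell}
    (g : PvGrid) (vis : PvCell → Bool) (q : List PvCell) :
    ∀ seen : PySem.Set PvCell, PvBInv H W g cont zero vis seen →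
    PvBInv H W (pvBfsA (H + 2) (W + 2) g vis q).1 cont zero
      (pvBfsA (H + 2) (W + 2) g vis q).2 (pvBfsB H W cont seen q) := by
  induction g, vis, q using pvBfsA.induct (N := H + 2) (M := W + 2) with
  | case1 g vis =>
    intro seen inv
    rw [pvBfsA.eq_def, pvBfsB.eq_def]
    exact inv
  | case2 g vis c rest s ih =>
    intro seen inv
    rw [pvBfsA.eq_def, pvBfsB.eq_def]
    dsimp only
    have hstepA : pvStepA (H + 2) (W + 2) g vis rest c
        = (pvNbrs c).foldl (pvVisitA (H + 2) (W + 2)) (g, vis, rest) := by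
      rw [pvNbrs_eq_map, List.foldl_map]
      rfl
    obtain ⟨inv1, hq⟩ := pvFold_sim (pvNbrs c) g vis rest seen inv
    have hsB : (pvNbrs c).foldl (pvVisitB H W cont) (seen, rest)
        = (((pvNbrs c).foldl (pvVisitB H W cont) (seen, rest)).1,
           ((pvNbrs c).foldl (pvVisitA (H + 2) (W + 2)) (g, vis, rest)).2.2) :=
      Prod.ext rfl hq.symm
    rw [hsB, ← hstepA] at inv1 ⊢
    exact ih _ inv1

-- reachability layer
theorem pvMem_nbrs {c n : PvCell} :
    n ∈ pvNbrs c ↔ (n = (c.1 - 1, c.2) ∨ n = (c.1 + 1, c.2) ∨ n = (c.1, c.2 - 1) ∨ n = (c.1, c.2 + 1)) := by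
  simp [pvNbrs]

theorem pvNbrs_symm {c n : PvCell} (h : n ∈ pvNbrs c) : c ∈ pvNbrs n := by
  rw [pvMem_nbrs] at h ⊢
  rcases h with rfl | rfl | rfl | rfl
  · exact Or.inr (Or.inl (Prod.ext (by dsimp; ring) (by dsimp)))
  · exact Or.inl (Prod.ext (by dsimp; ring) (by dsimp))
  · exact Or.inr (Or.inr (Or.inr (Prod.ext (by dsimp) (by dsimp; ring))))
  · exact Or.inr (Or.inr (Or.inl (Prod.ext (by dsimp) (by dsimp; ring))))

def pvStepR (H W : Int) (cont : PySem.Dict PvCell Char) (a b : PvCell) : Prop :=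
  b ∈ pvNbrs a ∧ pvInB H W b ∧ cont.contains b = false

def pvReach (H W : Int) (cont : PySem.Dict PvCell Char) (c : PvCell) : Prop :=
  Relation.ReflTransGen (pvStepR H W cont) ((0 : Int), (0 : Int)) c

theorem pvReach_mono {H W : Int} {cont cont' : PySem.Dict PvCell Char}
    (h : ∀ x : PvCell, cont'.contains x = true → cont.contains x = true) {c : PvCell}
    (hr : pvReach H W cont c) : pvReach H W cont' c := by
  refine Relation.ReflTransGen.mono ?_ hr
  rintro a b ⟨h1, h2, h3⟩
  refine ⟨h1, h2, ?_⟩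
  cases hx : cont'.contains b
  · rfl
  · rw [h b hx] at h3
    exact h3

-- a ring cell is reachable from the corner (walk along the border)
theorem pvReach_ring {H W : Int} {cont : PySem.Dict PvCell Char} (hH : 0 ≤ H) (hW : 0 ≤ W)
    (hair : ∀ c : PvCell, pvInB H W c → ¬ pvIntr H W c → cont.contains c = false) :
    ∀ c : PvCell, pvInB H W c → ¬ pvIntr H W c → pvReach H W cont c := by
  have hstep : ∀ a b : PvCell, b ∈ pvNbrs a → pvInB H W b → ¬ pvIntr H W b →
      pvReach H W cont a → pvReach H W cont b := by
    intro a b h1 h2 h3 h4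
    exact Relation.ReflTransGen.tail h4 ⟨h1, h2, hair b h2 h3⟩
  have hrow : ∀ (i : Int), (i = 0 ∨ i = H + 1) → pvReach H W cont (i, 0) →
      ∀ n : Nat, (n : Int) ≤ W + 1 → pvReach H W cont (i, (n : Int)) := by
    intro i hi hbase n
    induction n with
    | zero => intro _; exact hbase
    | succ k ih =>
      intro hk
      push_cast at hk ⊢
      refine hstep (i, (k : Int)) (i, (k : Int) + 1) ?_ ?_ ?_ (ih (by omega))
      · rw [pvMem_nbrs]
        exact Or.inr (Or.inr (Or.inr rfl))
      · exact ⟨by omega, by omega, by omega, by omega⟩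
      · intro hint
        obtain ⟨h1, h2, _, _⟩ := hint
        dsimp only at h1 h2
        omega
  have hcol : ∀ (j : Int), (j = 0 ∨ j = W + 1) → pvReach H W cont (0, j) →
      ∀ n : Nat, (n : Int) ≤ H + 1 → pvReach H W cont ((n : Int), j) := by
    intro j hj hbase n
    induction n with
    | zero => intro _; exact hbase
    | succ k ih =>
      intro hk
      push_cast at hk ⊢
      refine hstep ((k : Int), j) ((k : Int) + 1, j) ?_ ?_ ?_ (ih (by omega))
      · rw [pvMem_nbrs]
        exact Or.inr (Or.inl rfl)
      · rcases hj with rfl | rfl <;> exact ⟨by omega, by omega, by omega, by omega⟩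
      · intro hint
        obtain ⟨_, _, h3, h4⟩ := hint
        dsimp only at h3 h4
        rcases hj with rfl | rfl <;> omega
  have hcorner : pvReach H W cont ((0 : Int), W + 1) := by
    have := hrow 0 (Or.inl rfl) Relation.ReflTransGen.refl (W + 1).toNat
      (by rw [Int.toNat_of_nonneg (by omega)])
    rwa [Int.toNat_of_nonneg (by omega)] at this
  have hcorner2 : pvReach H W cont ((H + 1 : Int), 0) := by
    have := hcol 0 (Or.inl rfl) Relation.ReflTransGen.refl (H + 1).toNat
      (by rw [Int.toNat_of_nonneg (by omega)])
    rwa [Int.toNat_of_nonneg (by omega)] at this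
  rintro ⟨c1, c2⟩ hin hni
  obtain ⟨hb1, hb2, hb3, hb4⟩ := hin
  dsimp only at hb1 hb2 hb3 hb4
  have hcases : c1 = 0 ∨ c1 = H + 1 ∨ c2 = 0 ∨ c2 = W + 1 := by
    by_contra hcon
    push_neg at hcon
    exact hni ⟨by dsimp; omega, by dsimp; omega, by dsimp; omega, by dsimp; omega⟩
  rcases hcases with rfl | rfl | rfl | rfl
  · have := hrow 0 (Or.inl rfl) Relation.ReflTransGen.refl c2.toNat
      (by rw [Int.toNat_of_nonneg hb3]; omega)
    rwa [Int.toNat_of_nonneg hb3] at this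
  · have := hrow (H + 1) (Or.inr rfl) hcorner2 c2.toNat
      (by rw [Int.toNat_of_nonneg hb3]; omega)
    rwa [Int.toNat_of_nonneg hb3] at this
  · have := hcol 0 (Or.inl rfl) Relation.ReflTransGen.refl c1.toNat
      (by rw [Int.toNat_of_nonneg hb1]; omega)
    rwa [Int.toNat_of_nonneg hb1] at this
  · have := hcol (W + 1) (Or.inr rfl) hcorner c1.toNat
      (by rw [Int.toNat_of_nonneg hb1]; omega)
    rwa [Int.toNat_of_nonneg hb1] at this


-- facts about one neighbour-fold of the proof BFS
theorem pvFoldVisitB_facts {H W : Int} {cont : PySem.Dict PvCell Char} (ns : List PvCell) :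
    ∀ s : PvStB,
    (∀ x, x ∈ s.2 → x ∈ s.1) →
    (∀ x, x ∈ s.1 → x ∈ (ns.foldl (pvVisitB H W cont) s).1) ∧
    (∀ x, x ∈ s.2 → x ∈ (ns.foldl (pvVisitB H W cont) s).2) ∧
    (∀ x, x ∈ (ns.foldl (pvVisitB H W cont) s).1 → x ∈ s.1 ∨ x ∈ (ns.foldl (pvVisitB H W cont) s).2) ∧
    (∀ x, x ∈ (ns.foldl (pvVisitB H W cont) s).2 → x ∈ (ns.foldl (pvVisitB H W cont) s).1) ∧
    (∀ n ∈ ns, pvInB H W n → cont.contains n = false → n ∈ (ns.foldl (pvVisitB H W cont) s).1) := by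
  induction ns with
  | nil =>
    intro s hqs
    exact ⟨fun x hx => hx, fun x hx => hx, fun x hx => Or.inl hx, fun x hx => hqs x hx,
      fun n hn => absurd hn (List.not_mem_nil)⟩
  | cons n ns ih =>
    intro s hqs
    have hlocal : (∀ x, x ∈ s.1 → x ∈ (pvVisitB H W cont s n).1) ∧
        (∀ x, x ∈ s.2 → x ∈ (pvVisitB H W cont s n).2) ∧
        (∀ x, x ∈ (pvVisitB H W cont s n).1 → x ∈ s.1 ∨ x ∈ (pvVisitB H W cont s n).2) ∧
        (∀ x, x ∈ (pvVisitB H W cont s n).2 → x ∈ (pvVisitB H W cont s n).1) ∧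
        (pvInB H W n → cont.contains n = false → n ∈ (pvVisitB H W cont s n).1) := by
      unfold pvVisitB
      split
      · rename_i hcond
        refine ⟨fun x hx => by simp [PySem.Set.mem_add]; exact Or.inl hx,
          fun x hx => by simp; exact Or.inl hx,
          fun x hx => ?_,
          fun x hx => ?_, fun _ _ => by simp [PySem.Set.mem_add]⟩
        · rcases (PySem.Set.mem_add _ _ _).mp hx with h | h
          · exact Or.inl h
          · exact Or.inr (by simp [h])
        · rcases List.mem_append.mp hx with h | h
          · simp [PySem.Set.mem_add]
            exact Or.inl (hqs x h)
          · simp at h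
            simp [PySem.Set.mem_add, h]
      · rename_i hcond
        refine ⟨fun x hx => hx, fun x hx => hx, fun x hx => Or.inl hx, fun x hx => hqs x hx,
          fun hin hc => ?_⟩
        push_neg at hcond
        obtain ⟨h1, h2, h3, h4⟩ := hin
        have := hcond h1 h2 h3 h4
        by_cases hmem : n ∈ s.1
        · exact hmem
        · exact absurd (this (fun ht => hmem ((PySem.Set.contains_iff _ _).mp ht))) (by simp [hc])
    obtain ⟨l1, l2, l3, l4, l5⟩ := hlocal
    have hqs1 : ∀ x, x ∈ (pvVisitB H W cont s n).2 → x ∈ (pvVisitB H W cont s n).1 := l4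
    obtain ⟨i1, i2, i3, i4, i5⟩ := ih (pvVisitB H W cont s n) hqs1
    rw [List.foldl_cons]
    refine ⟨fun x hx => i1 x (l1 x hx), fun x hx => i2 x (l2 x hx), fun x hx => ?_, i4, ?_⟩
    · rcases i3 x hx with h | h
      · rcases l3 x h with h2 | h2
        · exact Or.inl h2
        · exact Or.inr (i2 x h2)
      · exact Or.inr h
    · intro m hm hin hc
      rcases List.mem_cons.mp hm with rfl | hm2
      · exact i1 m (l5 hin hc)
      · exact i5 m hm2 hin hc

theorem pvBfsB_mono {H W : Int} {cont : PySem.Dict PvCell Char} :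
    ∀ (seen : PySem.Set PvCell) (q : List PvCell),
    (∀ x, x ∈ q → x ∈ seen) →
    ∀ x, x ∈ seen → x ∈ pvBfsB H W cont seen q := by
  intro seen q
  induction seen, q using pvBfsB.induct (H := H) (W := W) (cont := cont) with
  | case1 seen =>
    intro _ x hx
    rw [pvBfsB.eq_def]
    exact hx
  | case2 seen c rest s ih =>
    intro hq x hx
    rw [pvBfsB.eq_def]
    dsimp only
    obtain ⟨f1, _, _, f4, _⟩ := pvFoldVisitB_facts (pvNbrs c) (seen, rest)
      (fun y hy => hq y (List.mem_cons.mpr (Or.inr hy)))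
    exact ih f4 x (f1 x hx)

theorem pvBfsB_sound {H W : Int} {cont : PySem.Dict PvCell Char} :
    ∀ (seen : PySem.Set PvCell) (q : List PvCell),
    (∀ x, x ∈ q → x ∈ seen) →
    (∀ x, x ∈ seen → pvReach H W cont x) →
    ∀ x, x ∈ pvBfsB H W cont seen q → pvReach H W cont x := by
  intro seen q
  induction seen, q using pvBfsB.induct (H := H) (W := W) (cont := cont) with
  | case1 seen =>
    intro _ hs x hx
    rw [pvBfsB.eq_def] at hx
    exact hs x hx
  | case2 seen c rest s ih =>
    intro hq hs x hx
    rw [pvBfsB.eq_def] at hx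
    dsimp only at hx
    have hreach : ∀ ns : List PvCell, (∀ n ∈ ns, n ∈ pvNbrs c) →
        ∀ t : PvStB, (∀ y, y ∈ t.1 → pvReach H W cont y) → (∀ y, y ∈ t.2 → y ∈ t.1) →
        (∀ y, y ∈ (ns.foldl (pvVisitB H W cont) t).1 → pvReach H W cont y) ∧
        (∀ y, y ∈ (ns.foldl (pvVisitB H W cont) t).2 → y ∈ (ns.foldl (pvVisitB H W cont) t).1) := by
      intro ns
      induction ns with
      | nil => exact fun _ t h1 h2 => ⟨h1, h2⟩
      | cons n ns ihn =>
        intro hns t h1 h2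
        rw [List.foldl_cons]
        have hlocal : (∀ y, y ∈ (pvVisitB H W cont t n).1 → pvReach H W cont y) ∧
            (∀ y, y ∈ (pvVisitB H W cont t n).2 → y ∈ (pvVisitB H W cont t n).1) := by
          unfold pvVisitB
          split
          · rename_i hcond
            obtain ⟨g1, g2, g3, g4, g5, g6⟩ := hcond
            constructor
            · intro y hy
              rcases (PySem.Set.mem_add _ _ _).mp hy with h | h
              · exact h1 y h
              · rw [h]
                refine Relation.ReflTransGen.tail (hs c (hq c (List.mem_cons.mpr (Or.inl rfl))))
                  ⟨hns n (List.mem_cons.mpr (Or.inl rfl)), ⟨g1, g2, g3, g4⟩, ?_⟩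
                cases hxc : cont.contains n
                · rfl
                · exact absurd hxc g6
            · intro y hy
              rcases List.mem_append.mp hy with h | h
              · simp [PySem.Set.mem_add]
                exact Or.inl (h2 y h)
              · simp at h
                simp [PySem.Set.mem_add, h]
          · exact ⟨h1, h2⟩
        exact ihn (fun m hm => hns m (List.mem_cons.mpr (Or.inr hm))) _ hlocal.1 hlocal.2
    obtain ⟨hr1, hr2⟩ := hreach (pvNbrs c) (fun n hn => hn) (seen, rest) hs
      (fun y hy => hq y (List.mem_cons.mpr (Or.inr hy)))
    exact ih hr2 hr1 x hx

theorem pvBfsB_closed {H W : Int} {cont : PySem.Dict PvCell Char} :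
    ∀ (seen : PySem.Set PvCell) (q : List PvCell),
    (∀ x, x ∈ q → x ∈ seen) →
    (∀ x, x ∈ seen → x ∈ q ∨ ∀ n ∈ pvNbrs x, pvInB H W n → cont.contains n = false → n ∈ seen) →
    ∀ x, x ∈ pvBfsB H W cont seen q →
      ∀ n ∈ pvNbrs x, pvInB H W n → cont.contains n = false → n ∈ pvBfsB H W cont seen q := by
  intro seen q
  induction seen, q using pvBfsB.induct (H := H) (W := W) (cont := cont) with
  | case1 seen =>
    intro hq hcl x hx n hn hin hc
    rw [pvBfsB.eq_def] at hx ⊢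
    rcases hcl x hx with h | h
    · exact absurd h (List.not_mem_nil)
    · exact h n hn hin hc
  | case2 seen c rest s ih =>
    intro hq hcl
    rw [pvBfsB.eq_def]
    dsimp only
    obtain ⟨f1, f2, f3, f4, f5⟩ := pvFoldVisitB_facts (pvNbrs c) (seen, rest)
      (fun y hy => hq y (List.mem_cons.mpr (Or.inr hy)))
    refine ih f4 ?_
    intro x hx
    rcases f3 x hx with hxs | hxq
    · rcases hcl x hxs with hxin | hxcl
      · rcases List.mem_cons.mp hxin with rfl | hxr
        · exact Or.inr (fun n hn hin hc => f5 n hn hin hc)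
        · exact Or.inl (f2 x hxr)
      · exact Or.inr (fun n hn hin hc => f1 n (hxcl n hn hin hc))
    · exact Or.inl hxq

theorem pvBfsB_complete {H W : Int} {cont : PySem.Dict PvCell Char}
    (seen : PySem.Set PvCell) (q : List PvCell)
    (hq : ∀ x, x ∈ q → x ∈ seen)
    (hcl : ∀ x, x ∈ seen → x ∈ q ∨ ∀ n ∈ pvNbrs x, pvInB H W n → cont.contains n = false → n ∈ seen)
    (h0 : ((0 : Int), (0 : Int)) ∈ seen) :
    ∀ c : PvCell, pvReach H W cont c → c ∈ pvBfsB H W cont seen q := by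
  intro c hr
  induction hr with
  | refl => exact pvBfsB_mono seen q hq _ h0
  | tail h1 h2 ih =>
    obtain ⟨hn, hin, hc⟩ := h2
    exact pvBfsB_closed seen q hq hcl _ ih _ hn hin hc

-- the standard seed
theorem pvSeen0_q : ∀ x : PvCell, x ∈ [((0 : Int), (0 : Int))] →
    x ∈ PySem.Set.add PySem.Set.empty ((0 : Int), (0 : Int)) := by
  intro x hx
  simp at hx
  simp [hx, PySem.Set.empty]

theorem pvSeen0_mem : ((0 : Int), (0 : Int)) ∈ PySem.Set.add PySem.Set.empty ((0 : Int), (0 : Int)) := by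
  simp

theorem pvSeen0_mem_eq : ∀ x : PvCell, x ∈ PySem.Set.add PySem.Set.empty ((0 : Int), (0 : Int)) →
    x = ((0 : Int), (0 : Int)) := by
  intro x hx
  simpa [PySem.Set.mem_add, PySem.Set.empty] using hx

theorem pvSeen0_cl {H W : Int} (cont : PySem.Dict PvCell Char) :
    ∀ x : PvCell, x ∈ PySem.Set.add PySem.Set.empty ((0 : Int), (0 : Int)) →
    x ∈ [((0 : Int), (0 : Int))] ∨
    ∀ n ∈ pvNbrs x, pvInB H W n → cont.contains n = false →
      n ∈ PySem.Set.add PySem.Set.empty ((0 : Int), (0 : Int)) := by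
  intro x hx
  exact Or.inl (by rw [pvSeen0_mem_eq x hx]; simp)

-- the proof BFS from the standard seed computes exactly the reachable set
theorem pvBfsB_iff_reach {H W : Int} (cont : PySem.Dict PvCell Char) (x : PvCell) :
    x ∈ pvBfsB H W cont (PySem.Set.add PySem.Set.empty ((0 : Int), (0 : Int)))
      [((0 : Int), (0 : Int))] ↔ pvReach H W cont x := by
  constructor
  · intro h
    refine pvBfsB_sound _ _ pvSeen0_q ?_ x h
    intro y hy
    rw [pvSeen0_mem_eq y hy]
    exact Relation.ReflTransGen.refl
  · exact pvBfsB_complete _ _ pvSeen0_q (pvSeen0_cl cont) pvSeen0_mem x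

-- B's sweep fixpoint computes exactly the reachable set
theorem pvSweepFold_sound {H W : Int} {cont : PySem.Dict PvCell Char} (ns : List PvCell) :
    ∀ s : PvStS, (∀ n ∈ ns, pvInB H W n) → (∀ x, x ∈ s.1 → pvReach H W cont x) →
    ∀ x, x ∈ (ns.foldl (pvSweepStep cont) s).1 → pvReach H W cont x := by
  induction ns with
  | nil => exact fun s _ hs x hx => hs x hx
  | cons n ns ih =>
    intro s hns hs
    rw [List.foldl_cons]
    refine ih _ (fun m hm => hns m (List.mem_cons_of_mem _ hm)) ?_
    intro x hx
    unfold pvSweepStep at hx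
    split at hx
    · rename_i hcond
      rcases (PySem.Set.mem_add _ _ _).mp hx with h | h
      · exact hs x h
      · subst h
        obtain ⟨m, hm, hms⟩ := List.any_eq_true.mp hcond.2.2
        exact Relation.ReflTransGen.tail (hs m ((PySem.Set.contains_iff _ _).mp hms))
          ⟨pvNbrs_symm hm, hns x (List.mem_cons_self ..), hcond.2.1⟩
    · exact hs x hx

theorem pvSweepFold_flag {cont : PySem.Dict PvCell Char} (ns : List PvCell) :
    ∀ s : PvStS, s.2 = true → (ns.foldl (pvSweepStep cont) s).2 = true := by
  induction ns with
  | nil => exact fun s h => h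
  | cons n ns ih =>
    intro s h
    rw [List.foldl_cons]
    apply ih
    unfold pvSweepStep
    split
    · rfl
    · exact h

theorem pvSweepFold_false {cont : PySem.Dict PvCell Char} (ns : List PvCell) :
    ∀ s : PvStS, (ns.foldl (pvSweepStep cont) s).2 = false →
    (ns.foldl (pvSweepStep cont) s).1 = s.1 ∧
    ∀ n ∈ ns, ¬ (¬ PySem.Set.contains s.1 n = true ∧ cont.contains n = false ∧
      (pvNbrs n).any (fun m => PySem.Set.contains s.1 m) = true) := by
  induction ns with
  | nil => exact fun s _ => ⟨rfl, fun n hn => absurd hn (List.not_mem_nil)⟩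
  | cons n ns ih =>
    intro s h
    rw [List.foldl_cons] at h ⊢
    by_cases hcond : ¬ PySem.Set.contains s.1 n = true ∧ cont.contains n = false ∧
        (pvNbrs n).any (fun m => PySem.Set.contains s.1 m) = true
    · exfalso
      have hfired : pvSweepStep cont s n = (PySem.Set.add s.1 n, true) := by
        unfold pvSweepStep
        rw [if_pos hcond]
      rw [hfired] at h
      rw [pvSweepFold_flag ns _ rfl] at h
      exact absurd h (by simp)
    · have hsame : pvSweepStep cont s n = s := by
        unfold pvSweepStep
        rw [if_neg hcond]
      rw [hsame] at h ⊢
      obtain ⟨h1, h2⟩ := ih s h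
      refine ⟨h1, fun m hm => ?_⟩
      rcases List.mem_cons.mp hm with rfl | hm2
      · exact hcond
      · exact h2 m hm2

theorem pvSweepLoop_spec {H W : Int} {cont : PySem.Dict PvCell Char} :
    ∀ (n : Nat) (reach : PySem.Set PvCell), pvUnreach H W reach = n →
    (∀ x, x ∈ reach → x ∈ pvSweepLoop H W cont reach) ∧
    ((∀ x, x ∈ reach → pvReach H W cont x) →
      ∀ x, x ∈ pvSweepLoop H W cont reach → pvReach H W cont x) ∧
    (∀ c : PvCell, pvInB H W c → cont.contains c = false →
      (∃ m ∈ pvNbrs c, m ∈ pvSweepLoop H W cont reach) → c ∈ pvSweepLoop H W cont reach) := by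
  intro n
  induction n using Nat.strong_induction_on with
  | _ n ih =>
    intro reach hn
    have heq : pvSweepLoop H W cont reach =
        (if ((pvCellsB H W).foldl (pvSweepStep cont) (reach, false)).2 = true
         then pvSweepLoop H W cont ((pvCellsB H W).foldl (pvSweepStep cont) (reach, false)).1
         else ((pvCellsB H W).foldl (pvSweepStep cont) (reach, false)).1) := by
      rw [pvSweepLoop.eq_def]
    by_cases hflag : ((pvCellsB H W).foldl (pvSweepStep cont) (reach, false)).2 = true
    · rw [heq, if_pos hflag]
      have hlt : pvUnreach H W ((pvCellsB H W).foldl (pvSweepStep cont) (reach, false)).1 < n :=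
        hn ▸ pvSweepPass_prop H W cont reach hflag
      obtain ⟨imono, isound, iclosed⟩ := ih _ hlt _ rfl
      refine ⟨fun x hx => imono x (pvSweepFold_mono cont (pvCellsB H W) (reach, false) x hx),
        fun hr => isound (fun x hx => pvSweepFold_sound (pvCellsB H W) (reach, false)
          (fun m hm => pvMem_cellsB.mp hm) hr x hx), iclosed⟩
    · rw [heq, if_neg hflag]
      have hfalse : ((pvCellsB H W).foldl (pvSweepStep cont) (reach, false)).2 = false := by
        cases hx : ((pvCellsB H W).foldl (pvSweepStep cont) (reach, false)).2
        · rfl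
        · exact absurd hx hflag
      obtain ⟨hz, hcl⟩ := pvSweepFold_false (pvCellsB H W) (reach, false) hfalse
      rw [hz]
      refine ⟨fun x hx => hx, fun hr x hx => hr x hx, ?_⟩
      intro c hc hfree hex
      have hcc := hcl c (pvMem_cellsB.mpr hc)
      by_cases hcr : c ∈ reach
      · exact hcr
      · exfalso
        obtain ⟨m, hm, hmr⟩ := hex
        refine hcc ⟨?_, hfree, ?_⟩
        · rw [PySem.Set.contains_iff]
          exact hcr
        · exact List.any_eq_true.mpr ⟨m, hm, (PySem.Set.contains_iff _ _).mpr hmr⟩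

theorem pvSweepLoop_mono {H W : Int} {cont : PySem.Dict PvCell Char}
    (reach : PySem.Set PvCell) : ∀ x, x ∈ reach → x ∈ pvSweepLoop H W cont reach :=
  (pvSweepLoop_spec _ reach rfl).1

theorem pvSweepLoop_sound {H W : Int} {cont : PySem.Dict PvCell Char}
    (reach : PySem.Set PvCell) (hr : ∀ x, x ∈ reach → pvReach H W cont x) :
    ∀ x, x ∈ pvSweepLoop H W cont reach → pvReach H W cont x :=
  (pvSweepLoop_spec _ reach rfl).2.1 hr

theorem pvSweepLoop_closed {H W : Int} {cont : PySem.Dict PvCell Char}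
    (reach : PySem.Set PvCell) (c : PvCell) (hc : pvInB H W c)
    (hfree : cont.contains c = false)
    (hex : ∃ m ∈ pvNbrs c, m ∈ pvSweepLoop H W cont reach) :
    c ∈ pvSweepLoop H W cont reach :=
  (pvSweepLoop_spec _ reach rfl).2.2 c hc hfree hex

theorem pvSweep_iff_reach {H W : Int} (cont : PySem.Dict PvCell Char) (x : PvCell) :
    x ∈ pvSweep H W cont ↔ pvReach H W cont x := by
  unfold pvSweep
  constructor
  · refine pvSweepLoop_sound _ ?_ x
    intro y hy
    rw [pvSeen0_mem_eq y hy]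
    exact Relation.ReflTransGen.refl
  · intro h
    induction h with
    | refl => exact pvSweepLoop_mono _ _ pvSeen0_mem
    | tail h1 h2 ih =>
      obtain ⟨hn, hin, hc⟩ := h2
      exact pvSweepLoop_closed _ _ hin hc ⟨_, pvNbrs_symm hn, ih⟩

def pvZFull (H W : Int) (g : PvGrid) (cont : PySem.Dict PvCell Char) : Prop :=
  ∀ c : PvCell, pvInB H W c → (pvGetC g c.1 c.2 = '0' ↔ pvReach H W cont c)

def pvZHalf (H W : Int) (g : PvGrid) (cont : PySem.Dict PvCell Char) : Prop :=
  ∀ c : PvCell, pvInB H W c → pvGetC g c.1 c.2 = '0' → pvReach H W cont c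

theorem pvZFull_toHalf {H W : Int} {g : PvGrid} {cont : PySem.Dict PvCell Char}
    (h : pvZFull H W g cont) : pvZHalf H W g cont :=
  fun c hc h0 => (h c hc).mp h0

theorem pvAfterFloodZ {H W : Int} {g2 : PvGrid}
    {cont' : PySem.Dict PvCell Char} {zero2 : PySem.Set PvCell}
    (binv : PvBInv H W g2 cont' zero2 (fun c => decide (c = ((0 : Int), (0 : Int))))
      (PySem.Set.add PySem.Set.empty ((0 : Int), (0 : Int))))
    (hHR : ∀ c : PvCell, pvInB H W c → pvGetC g2 c.1 c.2 = '0' → pvReach H W cont' c) :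
    pvZFull H W (pvUpdateA (H + 2) (W + 2) g2).1 cont' := by
  unfold pvUpdateA
  have final := pvBfs_sim (zero := zero2) g2 (fun c => decide (c = ((0 : Int), (0 : Int))))
    [((0 : Int), (0 : Int))] _ binv
  intro c hc
  constructor
  · intro h0
    rcases (final.zeroVis c hc).mp h0 with hz | hv
    · exact hHR c hc ((binv.zeroVis c hc).mpr (Or.inl hz))
    · exact (pvBfsB_iff_reach cont' c).mp ((final.visSeen c).mp hv)
  · intro hr
    exact (final.zeroVis c hc).mpr
      (Or.inr ((final.visSeen c).mpr ((pvBfsB_iff_reach cont' c).mpr hr)))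

theorem pvRingAir {H W : Int} {g : PvGrid} {cont : PySem.Dict PvCell Char}
    {zero : PySem.Set PvCell} (inv : PvInv H W g cont zero) :
    ∀ c : PvCell, pvInB H W c → ¬ pvIntr H W c → cont.contains c = false := by
  intro c hc hni
  cases hx : cont.contains c
  · rfl
  · exfalso
    have hk := (PySem.Dict.contains_iff_mem_keys cont c).mp hx
    obtain ⟨p, hp, hpc⟩ := List.mem_map.mp (by simpa only [PySem.Dict.keys] using hk)
    exact hni (hpc ▸ inv.keysInt p hp)

-- A's update() followed from a lockstep state yields the between-request invariant,
-- with B's external set grown by the sweep fixpoint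
theorem pvAfterFlood {H W : Int} {g2 : PvGrid} {cont' : PySem.Dict PvCell Char}
    {zero' : PySem.Set PvCell}
    (binv : PvBInv H W g2 cont' zero' (fun c => decide (c = ((0 : Int), (0 : Int))))
      (PySem.Set.add PySem.Set.empty ((0 : Int), (0 : Int))))
    (hki : ∀ p ∈ cont'.items, pvIntr H W p.1) (hkn : cont'.keys.Nodup) :
    PvInv H W (pvUpdateA (H + 2) (W + 2) g2).1 cont'
      (PySem.Set.update zero' (pvSweep H W cont')) := by
  unfold pvUpdateA
  have final := pvBfs_sim (zero := zero') g2 (fun c => decide (c = ((0 : Int), (0 : Int))))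
    [((0 : Int), (0 : Int))] _ binv
  refine ⟨final.shape, final.ring, ?_, final.contI, hki, hkn⟩
  intro c hc
  rw [PySem.Set.mem_update, final.zeroVis c hc]
  constructor
  · rintro (h | h)
    · exact Or.inl h
    · exact Or.inr ((pvSweep_iff_reach cont' c).mpr
        ((pvBfsB_iff_reach cont' c).mp ((final.visSeen c).mp h)))
  · rintro (h | h)
    · exact Or.inl h
    · exact Or.inr ((final.visSeen c).mpr
        ((pvBfsB_iff_reach cont' c).mpr ((pvSweep_iff_reach cont' c).mp h)))

theorem pvVisSeen0 (c : PvCell) :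
    (decide (c = ((0 : Int), (0 : Int))) = true ↔
      c ∈ PySem.Set.add PySem.Set.empty ((0 : Int), (0 : Int))) := by
  simp [PySem.Set.mem_add, PySem.Set.empty]

-- initial state: A's padded grid vs B's container dict and external set
set_option maxHeartbeats 1000000 in
theorem pvInit_sim (storage : List String) :
    PvInv (storage.length : Int) (PySem.Str.len (storage.getD 0 ""))
      ((PySem.List.pyRange 1 ((storage.length : Int) + 2 - 1) 1).foldl (fun g i =>
        (PySem.List.pyRange 1 (PySem.Str.len (storage.getD 0 "") + 2 - 1) 1).foldl (fun g j =>
          pvSetC g i j (pvStorChar storage i j)) g)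
        (List.replicate ((storage.length : Int) + 2).toNat
          (List.replicate (PySem.Str.len (storage.getD 0 "") + 2).toNat '0')))
      (((PySem.List.pyRange 0 (storage.length : Int) 1).flatMap (fun i =>
          (PySem.List.pyRange 0 (PySem.Str.len (storage.getD 0 "")) 1).map (fun j => ((i, j) : PvCell)))).foldl
        (fun d c =>
          if pvStorChar storage (c.1 + 1) (c.2 + 1) ≠ '0' ∧
              pvStorChar storage (c.1 + 1) (c.2 + 1) ≠ '1'
          then d.insert (c.1 + 1, c.2 + 1) (pvStorChar storage (c.1 + 1) (c.2 + 1)) else d)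
        PySem.Dict.empty)
      ((pvCellsB (storage.length : Int) (PySem.Str.len (storage.getD 0 ""))).foldl
        (fun s c =>
          if ¬ (1 ≤ c.1 ∧ c.1 ≤ (storage.length : Int) ∧ 1 ≤ c.2 ∧ c.2 ≤ PySem.Str.len (storage.getD 0 ""))
              ∨ pvStorChar storage c.1 c.2 = '0'
          then PySem.Set.add s c else s)
        PySem.Set.empty) := by
  set H := (storage.length : Int) with hH
  set W := PySem.Str.len (storage.getD 0 "") with hWdef
  have hHnn : 0 ≤ H := by rw [hH]; exact Int.natCast_nonneg _
  have hWnn : 0 ≤ W := by rw [hWdef, PySem.Str.len_eq]; exact Int.natCast_nonneg _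
  rw [pvNestedFoldl (f := fun (g : PvGrid) (c : PvCell) =>
    pvSetC g c.1 c.2 (pvStorChar storage c.1 c.2))]
  simp only [pvCellsR_def]
  -- A-side: grid characterization
  have hshape0 : pvShape H W (List.replicate (H + 2).toNat (List.replicate (W + 2).toNat '0')) := by
    refine ⟨List.length_replicate, fun row hr => ?_⟩
    rw [List.eq_of_mem_replicate hr]
    exact List.length_replicate
  have hget0 : ∀ c : PvCell, pvInB H W c →
      pvGetC (List.replicate (H + 2).toNat (List.replicate (W + 2).toNat '0')) c.1 c.2 = '0' := by
    intro c hc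
    unfold pvGetC
    rw [List.getD_eq_getElem _ [] (by rw [List.length_replicate]; omega), List.getElem_replicate,
      List.getD_eq_getElem _ '*' (by rw [List.length_replicate]; omega), List.getElem_replicate]
  have hcellsbox : ∀ c ∈ pvCellsR 1 (H + 2 - 1) 1 (W + 2 - 1), pvInB H W c := by
    intro c hc
    have := pvMem_cellsR.mp hc
    exact ⟨by omega, by omega, by omega, by omega⟩
  have hgA : ∀ d : PvCell, pvInB H W d →
      pvGetC ((pvCellsR 1 (H + 2 - 1) 1 (W + 2 - 1)).foldl
          (fun h c => pvSetC h c.1 c.2 (pvStorChar storage c.1 c.2))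
          (List.replicate (H + 2).toNat (List.replicate (W + 2).toNat '0'))) d.1 d.2
        = if d ∈ pvCellsR 1 (H + 2 - 1) 1 (W + 2 - 1) then pvStorChar storage d.1 d.2 else '0' := by
    intro d hd
    rw [pvGetC_foldl_setC (pvCellsR 1 (H + 2 - 1) 1 (W + 2 - 1))
      (fun c => pvStorChar storage c.1 c.2) _ hshape0 hcellsbox d hd]
    split
    · rfl
    · exact hget0 d hd
  -- B-side: cont0 characterization
  have hc0eq : ((pvCellsR 0 H 0 W).foldl
      (fun d c =>
        if pvStorChar storage (c.1 + 1) (c.2 + 1) ≠ '0' ∧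
            pvStorChar storage (c.1 + 1) (c.2 + 1) ≠ '1'
        then d.insert (c.1 + 1, c.2 + 1) (pvStorChar storage (c.1 + 1) (c.2 + 1)) else d)
      PySem.Dict.empty)
      = ((pvCellsR 0 H 0 W).filter (fun c => decide (pvStorChar storage (c.1 + 1) (c.2 + 1) ≠ '0' ∧
          pvStorChar storage (c.1 + 1) (c.2 + 1) ≠ '1'))).foldl
        (fun d c => d.insert (c.1 + 1, c.2 + 1) (pvStorChar storage (c.1 + 1) (c.2 + 1)))
        PySem.Dict.empty :=
    pvFoldl_ite_filter _ _ _ _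
  set l0f := (pvCellsR 0 H 0 W).filter (fun c => decide (pvStorChar storage (c.1 + 1) (c.2 + 1) ≠ '0' ∧
      pvStorChar storage (c.1 + 1) (c.2 + 1) ≠ '1')) with hl0f
  have hknodup : (l0f.map (fun c : PvCell => ((c.1 + 1, c.2 + 1) : PvCell))).Nodup := by
    refine List.Nodup.map ?_ ((pvNodup_cellsR 0 H 0 W).filter _)
    intro a b hab
    have h1 : a.1 + 1 = b.1 + 1 := congrArg Prod.fst hab
    have h2 : a.2 + 1 = b.2 + 1 := congrArg Prod.snd hab
    exact Prod.ext (by omega) (by omega)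
  have hitems0 : ((pvCellsR 0 H 0 W).foldl
      (fun d c =>
        if pvStorChar storage (c.1 + 1) (c.2 + 1) ≠ '0' ∧
            pvStorChar storage (c.1 + 1) (c.2 + 1) ≠ '1'
        then d.insert (c.1 + 1, c.2 + 1) (pvStorChar storage (c.1 + 1) (c.2 + 1)) else d)
      PySem.Dict.empty).items
      = l0f.map (fun c => (((c.1 + 1 : Int), (c.2 + 1 : Int)),
          pvStorChar storage (c.1 + 1) (c.2 + 1))) := by
    rw [hc0eq]
    have := PySem.Dict.items_foldl_insert_fresh l0f
      (fun c : PvCell => ((c.1 + 1, c.2 + 1) : PvCell))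
      (fun c => pvStorChar storage (c.1 + 1) (c.2 + 1))
      PySem.Dict.empty (fun a _ => PySem.Dict.contains_empty _) hknodup
    simpa using this
  have hkeys0 : ((pvCellsR 0 H 0 W).foldl
      (fun d c =>
        if pvStorChar storage (c.1 + 1) (c.2 + 1) ≠ '0' ∧
            pvStorChar storage (c.1 + 1) (c.2 + 1) ≠ '1'
        then d.insert (c.1 + 1, c.2 + 1) (pvStorChar storage (c.1 + 1) (c.2 + 1)) else d)
      PySem.Dict.empty).keys.Nodup := by
    simp only [PySem.Dict.keys, hitems0, List.map_map]
    simpa [Function.comp] using hknodup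
  have hget0? : ∀ c : PvCell, ((pvCellsR 0 H 0 W).foldl
      (fun d c =>
        if pvStorChar storage (c.1 + 1) (c.2 + 1) ≠ '0' ∧
            pvStorChar storage (c.1 + 1) (c.2 + 1) ≠ '1'
        then d.insert (c.1 + 1, c.2 + 1) (pvStorChar storage (c.1 + 1) (c.2 + 1)) else d)
      PySem.Dict.empty).get? c
      = (if pvIntr H W c ∧ pvStorChar storage c.1 c.2 ≠ '0' ∧ pvStorChar storage c.1 c.2 ≠ '1'
         then some (pvStorChar storage c.1 c.2) else none) := by
    intro c
    by_cases hP : pvIntr H W c ∧ pvStorChar storage c.1 c.2 ≠ '0' ∧ pvStorChar storage c.1 c.2 ≠ '1'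
    · rw [if_pos hP]
      refine PySem.Dict.get?_of_mem_items _ ?_ hkeys0
      rw [hitems0]
      refine List.mem_map.mpr ⟨(c.1 - 1, c.2 - 1), ?_, ?_⟩
      · rw [hl0f, List.mem_filter]
        obtain ⟨⟨a1, a2, a3, a4⟩, hP1, hP2⟩ := hP
        have e1 : c.1 - 1 + 1 = c.1 := by omega
        have e2 : c.2 - 1 + 1 = c.2 := by omega
        refine ⟨pvMem_cellsR.mpr ⟨by omega, by omega, by omega, by omega⟩, ?_⟩
        simp only [decide_eq_true_eq]
        rw [e1, e2]
        exact ⟨hP1, hP2⟩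
      · have e1 : c.1 - 1 + 1 = c.1 := by omega
        have e2 : c.2 - 1 + 1 = c.2 := by omega
        dsimp only
        rw [e1, e2]
    · rw [if_neg hP, PySem.Dict.get?_eq_none_iff_not_mem_keys]
      simp only [PySem.Dict.keys, hitems0, List.map_map, List.mem_map, Function.comp]
      rintro ⟨c0, hc0, hceq⟩
      rw [hl0f, List.mem_filter] at hc0
      obtain ⟨hcm, hcP⟩ := hc0
      have hm := pvMem_cellsR.mp hcm
      simp only [decide_eq_true_eq] at hcP
      apply hP
      have h1 : c0.1 + 1 = c.1 := congrArg Prod.fst hceq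
      have h2 : c0.2 + 1 = c.2 := congrArg Prod.snd hceq
      refine ⟨⟨by omega, by omega, by omega, by omega⟩, ?_, ?_⟩ <;> rw [← h1, ← h2]
      · exact hcP.1
      · exact hcP.2
  -- B-side: ext0 characterization
  have hext0 : ∀ c : PvCell, (c ∈ (pvCellsB H W).foldl
      (fun s c =>
        if ¬ (1 ≤ c.1 ∧ c.1 ≤ H ∧ 1 ≤ c.2 ∧ c.2 ≤ W) ∨ pvStorChar storage c.1 c.2 = '0'
        then PySem.Set.add s c else s)
      PySem.Set.empty)
      ↔ (pvInB H W c ∧ (¬ pvIntr H W c ∨ pvStorChar storage c.1 c.2 = '0')) := by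
    intro c
    rw [pvFoldl_ite_filter (P := fun c : PvCell =>
        ¬ (1 ≤ c.1 ∧ c.1 ≤ H ∧ 1 ≤ c.2 ∧ c.2 ≤ W) ∨ pvStorChar storage c.1 c.2 = '0')
      (f := fun s (c : PvCell) => PySem.Set.add s c)]
    rw [show ((pvCellsB H W).filter (fun c : PvCell =>
        decide (¬ (1 ≤ c.1 ∧ c.1 ≤ H ∧ 1 ≤ c.2 ∧ c.2 ≤ W) ∨ pvStorChar storage c.1 c.2 = '0'))).foldl
        (fun s (c : PvCell) => PySem.Set.add s c) PySem.Set.empty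
      = ((pvCellsB H W).filter (fun c : PvCell =>
        decide (¬ (1 ≤ c.1 ∧ c.1 ≤ H ∧ 1 ≤ c.2 ∧ c.2 ≤ W) ∨ pvStorChar storage c.1 c.2 = '0'))).foldl
        (fun s (c : PvCell) => PySem.Set.add s ((fun x : PvCell => x) c)) PySem.Set.empty from rfl]
    rw [PySem.Set.mem_foldl_add]
    simp only [List.mem_filter, pvMem_cellsB, decide_eq_true_eq]
    constructor
    · rintro (h | ⟨b, ⟨⟨b1, b2, b3, b4⟩, hbP⟩, rfl⟩)
      · exact absurd h (by simp [PySem.Set.empty])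
      · exact ⟨⟨b1, b2, b3, b4⟩, by
          rcases hbP with h | h
          · exact Or.inl (fun hint => h ⟨hint.1, hint.2.1, hint.2.2.1, hint.2.2.2⟩)
          · exact Or.inr h⟩
    · rintro ⟨⟨b1, b2, b3, b4⟩, hq⟩
      refine Or.inr ⟨c, ⟨⟨b1, b2, b3, b4⟩, ?_⟩, rfl⟩
      rcases hq with h | h
      · exact Or.inl (fun hint => h ⟨hint.1, hint.2.1, hint.2.2.1, hint.2.2.2⟩)
      · exact Or.inr h
  -- assemble
  refine ⟨pvShape_foldl_setC _ _ _ hshape0, ?_, ?_, ?_, ?_, hkeys0⟩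
  · intro c hc hnint
    rw [hgA c hc, if_neg (fun hmem => hnint (by
      have := pvMem_cellsR.mp hmem
      exact ⟨by omega, by omega, by omega, by omega⟩))]
  · intro c hc
    rw [hgA c hc, hext0 c]
    by_cases hmem : c ∈ pvCellsR 1 (H + 2 - 1) 1 (W + 2 - 1)
    · have hintr : pvIntr H W c := by
        have := pvMem_cellsR.mp hmem
        exact ⟨by omega, by omega, by omega, by omega⟩
      rw [if_pos hmem]
      constructor
      · intro h0
        exact ⟨hc, Or.inr h0⟩
      · rintro ⟨_, h | h⟩
        · exact absurd hintr h
        · exact h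
    · have hnintr : ¬ pvIntr H W c := fun hint =>
        hmem (pvMem_cellsR.mpr ⟨by omega, by omega, by omega, by omega⟩)
      rw [if_neg hmem]
      exact ⟨fun _ => ⟨hc, Or.inl hnintr⟩, fun _ => rfl⟩
  · intro c hc
    rw [hget0? c, hgA c hc]
    by_cases hmem : c ∈ pvCellsR 1 (H + 2 - 1) 1 (W + 2 - 1)
    · have hintr : pvIntr H W c := by
        have := pvMem_cellsR.mp hmem
        exact ⟨by omega, by omega, by omega, by omega⟩
      rw [if_pos hmem]
      by_cases hP : pvStorChar storage c.1 c.2 ≠ '0' ∧ pvStorChar storage c.1 c.2 ≠ '1'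
      · rw [if_pos ⟨hintr, hP.1, hP.2⟩, if_pos hP]
      · rw [if_neg (fun h => hP ⟨h.2.1, h.2.2⟩), if_neg hP]
    · have hnintr : ¬ pvIntr H W c := fun hint =>
        hmem (pvMem_cellsR.mpr ⟨by omega, by omega, by omega, by omega⟩)
      rw [if_neg hmem, if_neg (fun h => hnintr h.1), if_neg (by simp)]
  · intro p hp
    rw [hitems0] at hp
    obtain ⟨c0, hc0, rfl⟩ := List.mem_map.mp hp
    rw [hl0f, List.mem_filter] at hc0
    have hm := pvMem_cellsR.mp hc0.1
    exact ⟨by dsimp only; omega, by dsimp only; omega, by dsimp only; omega, by dsimp only; omega⟩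

-- named forms of the two per-request step functions (definitionally the port lambdas)
def pvStepReqA (H W : Int) (g : PvGrid) (r : String) : PvGrid :=
  match r.toList with
  | [] => g
  | t :: rest =>
    if rest.length = 0 then
      (pvUpdateA (H + 2) (W + 2)
        (((PySem.List.pyRange 1 (H + 2 - 1) 1).foldl (fun acc i =>
            (PySem.List.pyRange 1 (W + 2 - 1) 1).foldl (fun acc j =>
              if pvGetC g i j = t ∧ pvDirs.any (fun d => pvGetC g (i + d.1) (j + d.2) = '0')
              then acc ++ [((i : Int), (j : Int))] else acc) acc) ([] : List PvCell)).foldl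
          (fun h c => pvSetC h c.1 c.2 '0') g)).1
    else
      (pvUpdateA (H + 2) (W + 2)
        ((PySem.List.pyRange 1 (H + 2 - 1) 1).foldl (fun h i =>
            (PySem.List.pyRange 1 (W + 2 - 1) 1).foldl (fun h j =>
              if pvGetC h i j = t then pvSetC h i j '1' else h) h) g)).1

def pvStepReqB (H W : Int) (s : PySem.Dict PvCell Char × PySem.Set PvCell) (r : String) :
    PySem.Dict PvCell Char × PySem.Set PvCell :=
  match r.toList with
  | [] => s
  | t :: rest =>
    if rest.length = 0 then
      let gone := PySem.Set.ofList ((s.1.items.filter (fun p =>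
        p.2 == t && (pvNbrs p.1).any (fun n => PySem.Set.contains s.2 n))).map (·.1))
      let ext1 := PySem.Set.update s.2 gone
      let cont' := (s.1.items.filter (fun p => !(PySem.Set.contains gone p.1))).foldl
        (fun d p => d.insert p.1 p.2) PySem.Dict.empty
      (cont', PySem.Set.update ext1 (pvSweep H W cont'))
    else
      let gone := PySem.Set.ofList ((s.1.items.filter (fun p => p.2 == t)).map (·.1))
      let cont' := (s.1.items.filter (fun p => !(PySem.Set.contains gone p.1))).foldl
        (fun d p => d.insert p.1 p.2) PySem.Dict.empty
      (cont', PySem.Set.update s.2 (pvSweep H W cont'))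

-- one request preserves the invariant
set_option maxHeartbeats 2000000 in
theorem pvReq_sim {H W : Int} (hH : 0 ≤ H) (hW : 0 ≤ W) {g : PvGrid}
    {cont : PySem.Dict PvCell Char}
    {zero : PySem.Set PvCell} (inv : PvInv H W g cont zero) (r : String)
    (hr : r.toList ≠ [] ∧ ¬ (r.toList.length = 1 ∧ r.toList.headD ' ' = '1') ∧
      ¬ (r.toList.length ≠ 1 ∧ r.toList.headD ' ' = '0')) :
    PvInv H W (pvStepReqA H W g r) (pvStepReqB H W (cont, zero) r).1
      (pvStepReqB H W (cont, zero) r).2 ∧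
    (pvZHalf H W g cont → pvZHalf H W (pvStepReqA H W g r) (pvStepReqB H W (cont, zero) r).1) := by
  obtain ⟨hr1, hr2, hr3⟩ := hr
  have hI2B : ∀ c : PvCell, pvIntr H W c → pvInB H W c := by
    rintro c ⟨a, b, cc, d⟩
    exact ⟨by omega, by omega, by omega, by omega⟩
  have hintrGet : ∀ (c : PvCell) (v : Char), cont.get? c = some v → pvIntr H W c :=
    fun c v h =>
      inv.keysInt (c, v) ((PySem.Dict.get?_eq_some_iff_mem_items cont c v inv.keysNd).mp h)
  unfold pvStepReqA pvStepReqB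
  rcases hrl : r.toList with _ | ⟨t, rest⟩
  · exact absurd hrl hr1
  · simp only [hrl]
    by_cases hfork : rest.length = 0
    · -- forklift request
      have ht1 : t ≠ '1' := by
        intro h
        exact hr2 ⟨by rw [hrl]; simp [hfork], by rw [hrl]; simp [h]⟩
      rw [if_pos hfork, if_pos hfork]
      dsimp only
      rw [pvNestedFoldl (f := fun (acc : List PvCell) (c : PvCell) =>
            if pvGetC g c.1 c.2 = t ∧ pvDirs.any (fun d => pvGetC g (c.1 + d.1) (c.2 + d.2) = '0')
            then acc ++ [c] else acc),
          pvCellsR_def, PySem.List.foldl_append_ite_eq_filter, List.nil_append]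
      set rl := (pvCellsR 1 (H + 2 - 1) 1 (W + 2 - 1)).filter
        (fun c => decide (pvGetC g c.1 c.2 = t ∧
          (pvDirs.any fun d => pvGetC g (c.1 + d.1) (c.2 + d.2) = '0') = true)) with hrldef
      set hit := ((cont.items.filter (fun p =>
        p.2 == t && (pvNbrs p.1).any (fun n => PySem.Set.contains zero n))).map (·.1)) with hhitdef
      set gone := PySem.Set.ofList hit with hgonedef
      set cont' := (cont.items.filter (fun p => !(PySem.Set.contains gone p.1))).foldl
        (fun d p => d.insert p.1 p.2) PySem.Dict.empty with hcontdef
      set zero' := PySem.Set.update zero gone with hzerodef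
      set g2 := rl.foldl (fun h c => pvSetC h c.1 c.2 '0') g with hg2def
      have hrlm : ∀ c : PvCell, c ∈ rl ↔ pvIntr H W c ∧ pvGetC g c.1 c.2 = t ∧
          (pvDirs.any fun d => pvGetC g (c.1 + d.1) (c.2 + d.2) = '0') = true := by
        intro c
        rw [hrldef, List.mem_filter, pvMem_cellsR, decide_eq_true_eq]
        constructor
        · rintro ⟨⟨a, b, cc, d⟩, h2⟩
          exact ⟨⟨by omega, by omega, by omega, by omega⟩, h2⟩
        · rintro ⟨⟨a, b, cc, d⟩, h2⟩
          exact ⟨⟨by omega, by omega, by omega, by omega⟩, h2⟩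
      have hhitm : ∀ c : PvCell, c ∈ hit ↔ cont.get? c = some t ∧
          ((pvNbrs c).any (fun n => PySem.Set.contains zero n)) = true := by
        intro c
        rw [hhitdef]
        constructor
        · intro hc
          obtain ⟨p, hpf, hpc⟩ := List.mem_map.mp hc
          obtain ⟨hpi, hpP⟩ := List.mem_filter.mp hpf
          rw [Bool.and_eq_true] at hpP
          obtain ⟨hbeq, hany⟩ := hpP
          have hpt : p.2 = t := by simpa using hbeq
          have hp : p = (c, t) := Prod.ext hpc hpt
          rw [hp] at hpi
          refine ⟨(PySem.Dict.get?_eq_some_iff_mem_items cont c t inv.keysNd).mpr hpi, ?_⟩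
          rw [← hpc]
          exact hany
        · rintro ⟨hg?, hany⟩
          exact List.mem_map.mpr ⟨(c, t),
            List.mem_filter.mpr
              ⟨(PySem.Dict.get?_eq_some_iff_mem_items cont c t inv.keysNd).mp hg?,
               by rw [show (((c, t) : PvCell × Char).2 == t) = true from by simp,
                 Bool.true_and]; exact hany⟩, rfl⟩
      have hbridge : ∀ c : PvCell, pvIntr H W c →
          (pvDirs.any fun d => pvGetC g (c.1 + d.1) (c.2 + d.2) = '0')
            = ((pvNbrs c).any fun n => PySem.Set.contains zero n) := by
        intro c hc
        rw [pvNbrs_eq_map, List.any_map]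
        refine PySem.List.any_congr_mem ?_
        intro d hd
        have hdm : d = ((-1 : Int), (0 : Int)) ∨ d = (1, 0) ∨ d = (0, -1) ∨ d = (0, 1) := by
          simpa [pvDirs] using hd
        have hd1 : -1 ≤ d.1 ∧ d.1 ≤ 1 ∧ -1 ≤ d.2 ∧ d.2 ≤ 1 := by
          rcases hdm with rfl | rfl | rfl | rfl <;> refine ⟨by norm_num, by norm_num, by norm_num, by norm_num⟩
        have hnb : pvInB H W (c.1 + d.1, c.2 + d.2) := by
          obtain ⟨a1, a2, a3, a4⟩ := hc
          exact ⟨by omega, by omega, by omega, by omega⟩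
        have hiff := inv.zeroI _ hnb
        by_cases h0 : pvGetC g (c.1 + d.1) (c.2 + d.2) = '0'
        · simp only [Function.comp]
          rw [decide_eq_true (by exact h0)]
          exact ((PySem.Set.contains_iff _ _).mpr (hiff.mp h0)).symm
        · have hnm : ¬ (c.1 + d.1, c.2 + d.2) ∈ zero := fun hm => h0 (hiff.mpr hm)
          simp only [Function.comp]
          cases hcon : PySem.Set.contains zero (c.1 + d.1, c.2 + d.2) with
          | false => simp [h0]
          | true => exact absurd ((PySem.Set.contains_iff _ _).mp hcon) hnm
      have hset : ∀ c : PvCell, c ∈ hit ↔ (c ∈ rl ∧ t ≠ '0') := by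
        intro c
        constructor
        · intro hc
          obtain ⟨hg?, hany⟩ := (hhitm c).mp hc
          have hintr := hintrGet c t hg?
          have hin := hI2B c hintr
          have hcieq := inv.contI c hin
          rw [hg?] at hcieq
          have hchar : pvGetC g c.1 c.2 = t ∧ t ≠ '0' ∧ t ≠ '1' := by
            by_cases hcase : pvGetC g c.1 c.2 ≠ '0' ∧ pvGetC g c.1 c.2 ≠ '1'
            · rw [if_pos hcase] at hcieq
              have hte := Option.some.inj hcieq
              exact ⟨hte.symm, by rw [hte]; exact hcase.1, by rw [hte]; exact hcase.2⟩
            · rw [if_neg hcase] at hcieq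
              exact absurd hcieq (by simp)
          refine ⟨(hrlm c).mpr ⟨hintr, hchar.1, ?_⟩, hchar.2.1⟩
          rw [hbridge c hintr]
          exact hany
        · rintro ⟨hcr, ht0⟩
          obtain ⟨hintr, hchar, hany⟩ := (hrlm c).mp hcr
          have hin := hI2B c hintr
          have hg? : cont.get? c = some t := by
            rw [inv.contI c hin,
              if_pos ⟨by rw [hchar]; exact ht0, by rw [hchar]; exact ht1⟩, hchar]
          refine (hhitm c).mpr ⟨hg?, ?_⟩
          rw [← hbridge c hintr]
          exact hany
      have hgone : ∀ x : PvCell, x ∈ gone ↔ x ∈ hit := by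
        intro x
        rw [hgonedef]
        exact PySem.Set.mem_ofList hit x
      have hcg : ∀ x : PvCell, cont'.get? x = if x ∈ hit then none else cont.get? x := by
        intro x
        rw [hcontdef, pvRebuild_get? cont gone inv.keysNd x]
        by_cases hx : x ∈ hit
        · rw [if_pos ((hgone x).mpr hx), if_pos hx]
        · rw [if_neg (fun hmem => hx ((hgone x).mp hmem)), if_neg hx]
      have hki' : ∀ p ∈ cont'.items, pvIntr H W p.1 := by
        intro p hp
        rw [hcontdef, pvRebuild_items cont gone inv.keysNd] at hp
        exact inv.keysInt p (List.mem_filter.mp hp).1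
      have hkn' : cont'.keys.Nodup := by
        rw [hcontdef]
        exact pvRebuild_keys_nodup cont gone inv.keysNd
      have hmono : ∀ x : PvCell, cont'.contains x = true → cont.contains x = true := by
        intro x hx
        rw [PySem.Dict.contains_eq_isSome_get?] at hx ⊢
        rw [hcg x] at hx
        by_cases hxh : x ∈ hit
        · rw [if_pos hxh] at hx
          simp at hx
        · rw [if_neg hxh] at hx
          exact hx
      have hrlbox : ∀ c ∈ rl, pvInB H W c := fun c hc => hI2B c ((hrlm c).mp hc).1
      have hshape2 : pvShape H W g2 := by
        rw [hg2def]
        exact pvShape_foldl_setC rl (fun _ => '0') g inv.shape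
      have hg2get : ∀ d : PvCell, pvInB H W d →
          pvGetC g2 d.1 d.2 = if d ∈ rl then '0' else pvGetC g d.1 d.2 := by
        intro d hd
        rw [hg2def]
        exact pvGetC_foldl_setC rl (fun _ => '0') g inv.shape hrlbox d hd
      have hz' : ∀ c : PvCell, c ∈ zero' ↔ c ∈ zero ∨ c ∈ hit := by
        intro c
        rw [hzerodef, PySem.Set.mem_update]
        exact or_congr Iff.rfl (hgone c)
      have hringF : ∀ c : PvCell, pvInB H W c → ¬ pvIntr H W c → pvGetC g2 c.1 c.2 = '0' := by
        intro c hc hni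
        rw [hg2get c hc]
        split
        · rfl
        · exact inv.ring c hc hni
      have hzvF : ∀ c : PvCell, pvInB H W c →
          (pvGetC g2 c.1 c.2 = '0' ↔ (c ∈ zero' ∨ decide (c = ((0 : Int), (0 : Int))) = true)) := by
        intro c hc
        rw [hg2get c hc]
        by_cases hcr : c ∈ rl
        · rw [if_pos hcr]
          refine ⟨fun _ => ?_, fun _ => rfl⟩
          by_cases ht0 : t = '0'
          · have hchar := ((hrlm c).mp hcr).2.1
            exact Or.inl ((hz' c).mpr (Or.inl ((inv.zeroI c hc).mp (by rw [hchar, ht0]))))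
          · exact Or.inl ((hz' c).mpr (Or.inr ((hset c).mpr ⟨hcr, ht0⟩)))
        · rw [if_neg hcr]
          have hnh : ¬ c ∈ hit := fun hh => hcr ((hset c).mp hh).1
          constructor
          · intro h0
            exact Or.inl ((hz' c).mpr (Or.inl ((inv.zeroI c hc).mp h0)))
          · rintro (hz | hv)
            · rcases (hz' c).mp hz with h | h
              · exact (inv.zeroI c hc).mpr h
              · exact absurd h hnh
            · have hc0 : c = ((0 : Int), (0 : Int)) := of_decide_eq_true hv
              subst hc0
              exact inv.ring _ hc (fun hint => by
                obtain ⟨h1, _⟩ := hint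
                simp at h1)
      have hcIF : ∀ c : PvCell, pvInB H W c → cont'.get? c =
          (if pvGetC g2 c.1 c.2 ≠ '0' ∧ pvGetC g2 c.1 c.2 ≠ '1' then some (pvGetC g2 c.1 c.2) else none) := by
        intro c hc
        have hge := hcg c
        rw [hge, hg2get c hc]
        by_cases hcr : c ∈ rl
        · rw [if_pos hcr, if_neg (show ¬ ('0' ≠ '0' ∧ '0' ≠ '1') by simp)]
          by_cases hch : c ∈ hit
          · rw [if_pos hch]
          · rw [if_neg hch]
            have ht0 : t = '0' := by
              by_contra ht0
              exact hch ((hset c).mpr ⟨hcr, ht0⟩)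
            have hchar := ((hrlm c).mp hcr).2.1
            rw [inv.contI c hc, if_neg (fun hcontra => hcontra.1 (by rw [hchar, ht0]))]
        · rw [if_neg hcr, if_neg (fun hh => hcr ((hset c).mp hh).1)]
          exact inv.contI c hc
      have binv : PvBInv H W g2 cont' zero' (fun c => decide (c = ((0 : Int), (0 : Int))))
          (PySem.Set.add PySem.Set.empty ((0 : Int), (0 : Int))) :=
        ⟨hshape2, hringF, pvVisSeen0, hzvF, hcIF⟩
      refine ⟨pvAfterFlood binv hki' hkn', fun hZ => pvZFull_toHalf (pvAfterFloodZ binv ?_)⟩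
      intro c hc h0
      rw [hg2get c hc] at h0
      by_cases hcr : c ∈ rl
      · obtain ⟨hintr, hchar, hany⟩ := (hrlm c).mp hcr
        obtain ⟨d, hd, hd0⟩ := List.any_eq_true.mp hany
        have hz0 : pvGetC g (c.1 + d.1) (c.2 + d.2) = '0' := of_decide_eq_true hd0
        have hdm : d = ((-1 : Int), (0 : Int)) ∨ d = (1, 0) ∨ d = (0, -1) ∨ d = (0, 1) := by
          simpa [pvDirs] using hd
        have hnb : pvInB H W (c.1 + d.1, c.2 + d.2) := by
          obtain ⟨a1, a2, a3, a4⟩ := hintr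
          have hd1 : -1 ≤ d.1 ∧ d.1 ≤ 1 ∧ -1 ≤ d.2 ∧ d.2 ≤ 1 := by
            rcases hdm with rfl | rfl | rfl | rfl <;>
              refine ⟨by norm_num, by norm_num, by norm_num, by norm_num⟩
          exact ⟨by omega, by omega, by omega, by omega⟩
        have hrz : pvReach H W cont' (c.1 + d.1, c.2 + d.2) :=
          pvReach_mono hmono (hZ _ hnb hz0)
        refine Relation.ReflTransGen.tail hrz ⟨?_, hc, ?_⟩
        · refine pvNbrs_symm ?_
          rw [pvNbrs_eq_map]
          exact List.mem_map.mpr ⟨d, hd, rfl⟩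
        · rw [PySem.Dict.contains_eq_isSome_get?, hcg c]
          by_cases hch : c ∈ hit
          · rw [if_pos hch]
            rfl
          · rw [if_neg hch]
            have ht0 : t = '0' := by
              by_contra ht0'
              exact hch ((hset c).mpr ⟨hcr, ht0'⟩)
            rw [inv.contI c hc, if_neg (fun hcontra => hcontra.1 (by rw [hchar, ht0]))]
            rfl
      · rw [if_neg hcr] at h0
        exact pvReach_mono hmono (hZ c hc h0)
    · -- crane request
      have ht0 : t ≠ '0' := by
        intro h
        exact hr3 ⟨by rw [hrl]; simp [hfork], by rw [hrl]; simp [h]⟩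
      rw [if_neg hfork, if_neg hfork]
      dsimp only
      rw [pvNestedFoldl (f := fun (h : PvGrid) (c : PvCell) =>
            if pvGetC h c.1 c.2 = t then pvSetC h c.1 c.2 '1' else h), pvCellsR_def]
      set hit := ((cont.items.filter (fun p => p.2 == t)).map (·.1)) with hhitdef
      set gone := PySem.Set.ofList hit with hgonedef
      set cont' := (cont.items.filter (fun p => !(PySem.Set.contains gone p.1))).foldl
        (fun d p => d.insert p.1 p.2) PySem.Dict.empty with hcontdef
      set g2 := (pvCellsR 1 (H + 2 - 1) 1 (W + 2 - 1)).foldl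
        (fun h c => if pvGetC h c.1 c.2 = t then pvSetC h c.1 c.2 '1' else h) g with hg2def
      have hcellsbox : ∀ c ∈ pvCellsR 1 (H + 2 - 1) 1 (W + 2 - 1), pvInB H W c := by
        intro c hcm
        have := pvMem_cellsR.mp hcm
        exact ⟨by omega, by omega, by omega, by omega⟩
      have hshape2 : pvShape H W g2 := by
        rw [hg2def]
        exact pvShape_crane _ t g inv.shape
      have hg2get : ∀ d : PvCell, pvInB H W d → pvGetC g2 d.1 d.2
          = if d ∈ pvCellsR 1 (H + 2 - 1) 1 (W + 2 - 1) ∧ pvGetC g d.1 d.2 = t then '1'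
            else pvGetC g d.1 d.2 := by
        intro d hd
        rw [hg2def]
        exact pvGetC_crane _ t g inv.shape hcellsbox d hd
      have hhitm : ∀ c : PvCell, c ∈ hit ↔ cont.get? c = some t := by
        intro c
        rw [hhitdef]
        constructor
        · intro hc
          obtain ⟨p, hpf, hpc⟩ := List.mem_map.mp hc
          obtain ⟨hpi, hpP⟩ := List.mem_filter.mp hpf
          have hpt : p.2 = t := by simpa using hpP
          have hp : p = (c, t) := Prod.ext hpc hpt
          rw [hp] at hpi
          exact (PySem.Dict.get?_eq_some_iff_mem_items cont c t inv.keysNd).mpr hpi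
        · intro hg?
          exact List.mem_map.mpr ⟨(c, t),
            List.mem_filter.mpr
              ⟨(PySem.Dict.get?_eq_some_iff_mem_items cont c t inv.keysNd).mp hg?, by simp⟩, rfl⟩
      have hgone : ∀ x : PvCell, x ∈ gone ↔ x ∈ hit := by
        intro x
        rw [hgonedef]
        exact PySem.Set.mem_ofList hit x
      have hcg : ∀ x : PvCell, cont'.get? x = if x ∈ hit then none else cont.get? x := by
        intro x
        rw [hcontdef, pvRebuild_get? cont gone inv.keysNd x]
        by_cases hx : x ∈ hit
        · rw [if_pos ((hgone x).mpr hx), if_pos hx]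
        · rw [if_neg (fun hmem => hx ((hgone x).mp hmem)), if_neg hx]
      have hki' : ∀ p ∈ cont'.items, pvIntr H W p.1 := by
        intro p hp
        rw [hcontdef, pvRebuild_items cont gone inv.keysNd] at hp
        exact inv.keysInt p (List.mem_filter.mp hp).1
      have hkn' : cont'.keys.Nodup := by
        rw [hcontdef]
        exact pvRebuild_keys_nodup cont gone inv.keysNd
      have hmono : ∀ x : PvCell, cont'.contains x = true → cont.contains x = true := by
        intro x hx
        rw [PySem.Dict.contains_eq_isSome_get?] at hx ⊢
        rw [hcg x] at hx
        by_cases hxh : x ∈ hit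
        · rw [if_pos hxh] at hx
          simp at hx
        · rw [if_neg hxh] at hx
          exact hx
      have hringC : ∀ c : PvCell, pvInB H W c → ¬ pvIntr H W c → pvGetC g2 c.1 c.2 = '0' := by
        intro c hc hni
        rw [hg2get c hc, if_neg (fun hcond => hni (by
          have := pvMem_cellsR.mp hcond.1
          exact ⟨by omega, by omega, by omega, by omega⟩))]
        exact inv.ring c hc hni
      have hzvC : ∀ c : PvCell, pvInB H W c →
          (pvGetC g2 c.1 c.2 = '0' ↔ (c ∈ zero ∨ decide (c = ((0 : Int), (0 : Int))) = true)) := by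
        intro c hc
        rw [hg2get c hc]
        by_cases hcond : c ∈ pvCellsR 1 (H + 2 - 1) 1 (W + 2 - 1) ∧ pvGetC g c.1 c.2 = t
        · rw [if_pos hcond]
          constructor
          · intro h
            exact absurd h (by decide)
          · rintro (hz | hv)
            · have h0 := (inv.zeroI c hc).mpr hz
              exact absurd (hcond.2.symm.trans h0) ht0
            · have hc0 : c = ((0 : Int), (0 : Int)) := of_decide_eq_true hv
              subst hc0
              obtain ⟨h1, _⟩ := pvMem_cellsR.mp hcond.1
              simp at h1
        · rw [if_neg hcond]
          constructor
          · intro h0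
            exact Or.inl ((inv.zeroI c hc).mp h0)
          · rintro (hz | hv)
            · exact (inv.zeroI c hc).mpr hz
            · have hc0 : c = ((0 : Int), (0 : Int)) := of_decide_eq_true hv
              subst hc0
              exact inv.ring _ hc (fun hint => by
                obtain ⟨h1, _⟩ := hint
                simp at h1)
      have hcIC : ∀ c : PvCell, pvInB H W c → cont'.get? c =
          (if pvGetC g2 c.1 c.2 ≠ '0' ∧ pvGetC g2 c.1 c.2 ≠ '1' then some (pvGetC g2 c.1 c.2) else none) := by
        intro c hc
        have hge := hcg c
        rw [hge, hg2get c hc]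
        by_cases hcond : c ∈ pvCellsR 1 (H + 2 - 1) 1 (W + 2 - 1) ∧ pvGetC g c.1 c.2 = t
        · rw [if_pos hcond, if_neg (show ¬ ('1' ≠ '0' ∧ '1' ≠ '1') by simp)]
          by_cases hch : c ∈ hit
          · rw [if_pos hch]
          · rw [if_neg hch]
            by_cases hPt : t ≠ '0' ∧ t ≠ '1'
            · exact absurd ((hhitm c).mpr (by
                rw [inv.contI c hc, if_pos (by rw [hcond.2]; exact hPt), hcond.2])) hch
            · have ht1 : t = '1' := by
                by_contra ht1'
                exact hPt ⟨ht0, ht1'⟩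
              rw [inv.contI c hc, if_neg (fun hcontra => hcontra.2 (by rw [hcond.2, ht1]))]
        · rw [if_neg hcond]
          have hch : ¬ c ∈ hit := by
            intro hch
            have hg? := (hhitm c).mp hch
            have hcieq := inv.contI c hc
            rw [hg?] at hcieq
            by_cases hcase : pvGetC g c.1 c.2 ≠ '0' ∧ pvGetC g c.1 c.2 ≠ '1'
            · rw [if_pos hcase] at hcieq
              have hintr := hintrGet c t hg?
              refine hcond ⟨pvMem_cellsR.mpr (by
                obtain ⟨a, b, cc, d⟩ := hintr
                exact ⟨by omega, by omega, by omega, by omega⟩), (Option.some.inj hcieq).symm⟩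
            · rw [if_neg hcase] at hcieq
              exact absurd hcieq (by simp)
          rw [if_neg hch]
          exact inv.contI c hc
      have binv : PvBInv H W g2 cont' zero (fun c => decide (c = ((0 : Int), (0 : Int))))
          (PySem.Set.add PySem.Set.empty ((0 : Int), (0 : Int))) :=
        ⟨hshape2, hringC, pvVisSeen0, hzvC, hcIC⟩
      refine ⟨pvAfterFlood binv hki' hkn', fun hZ => pvZFull_toHalf (pvAfterFloodZ binv ?_)⟩
      intro c hc h0
      rw [hg2get c hc] at h0
      by_cases hcond : c ∈ pvCellsR 1 (H + 2 - 1) 1 (W + 2 - 1) ∧ pvGetC g c.1 c.2 = t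
      · rw [if_pos hcond] at h0
        exact absurd h0 (by decide)
      · rw [if_neg hcond] at h0
        exact pvReach_mono hmono (hZ c hc h0)

theorem pvStorChar_no0 {storage : List String}
    (hclean : ∀ s ∈ storage, ∀ ch ∈ s.toList, ch ≠ '0') (i j : Int) :
    pvStorChar storage i j ≠ '0' := by
  unfold pvStorChar
  by_cases hi : (i - 1).toNat < storage.length
  · rw [List.getD_eq_getElem storage "" hi]
    by_cases hj : (j - 1).toNat < (storage[(i - 1).toNat]).toList.length
    · rw [List.getD_eq_getElem _ '*' hj]
      exact hclean _ (List.getElem_mem hi) _ (List.getElem_mem hj)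
    · rw [List.getD_eq_default _ '*' (by omega)]
      decide
  · rw [List.getD_eq_default storage "" (by omega)]
    rw [show ("" : String).toList = [] from rfl]
    rw [List.getD_eq_default [] '*' (by simp)]
    decide

-- forklift request '1': A clears exposed '1'-cells, but the sweep reaches them anyway
set_option maxHeartbeats 1000000 in
theorem pvReq1_sim {H W : Int} (_hH : 0 ≤ H) (_hW : 0 ≤ W) {g : PvGrid}
    {cont : PySem.Dict PvCell Char} {zero : PySem.Set PvCell} (inv : PvInv H W g cont zero)
    (hZ : pvZHalf H W g cont) (r : String) (hrl : r.toList = ['1']) :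
    PvInv H W (pvStepReqA H W g r) (pvStepReqB H W (cont, zero) r).1
      (pvStepReqB H W (cont, zero) r).2 ∧
    pvZHalf H W (pvStepReqA H W g r) (pvStepReqB H W (cont, zero) r).1 := by
  unfold pvStepReqA pvStepReqB
  simp only [hrl]
  rw [if_pos (show ([] : List Char).length = 0 from rfl), if_pos (show ([] : List Char).length = 0 from rfl)]
  dsimp only
  rw [pvNestedFoldl (f := fun (acc : List PvCell) (c : PvCell) =>
        if pvGetC g c.1 c.2 = '1' ∧ pvDirs.any (fun d => pvGetC g (c.1 + d.1) (c.2 + d.2) = '0')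
        then acc ++ [c] else acc),
      pvCellsR_def, PySem.List.foldl_append_ite_eq_filter, List.nil_append]
  have hhitnil : cont.items.filter (fun p =>
      p.2 == '1' && (pvNbrs p.1).any (fun n => PySem.Set.contains zero n)) = [] := by
    rw [List.filter_eq_nil_iff]
    intro p hp
    have hg? : cont.get? p.1 = some p.2 :=
      (PySem.Dict.get?_eq_some_iff_mem_items cont p.1 p.2 inv.keysNd).mpr hp
    have hintr := inv.keysInt p hp
    have hin : pvInB H W p.1 := by
      obtain ⟨a, b, cc, d⟩ := hintr
      exact ⟨by omega, by omega, by omega, by omega⟩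
    have hcieq := inv.contI p.1 hin
    rw [hg?] at hcieq
    have hne1 : p.2 ≠ '1' := by
      by_cases hcase : pvGetC g p.1.1 p.1.2 ≠ '0' ∧ pvGetC g p.1.1 p.1.2 ≠ '1'
      · rw [if_pos hcase] at hcieq
        rw [Option.some.inj hcieq]
        exact hcase.2
      · rw [if_neg hcase] at hcieq
        exact absurd hcieq (by simp)
    simp [hne1]
  rw [hhitnil]
  simp only [List.map_nil, PySem.Set.ofList_nil, PySem.Set.update_nil]
  rw [pvRebuild_nil cont inv.keysNd]
  set rl := (pvCellsR 1 (H + 2 - 1) 1 (W + 2 - 1)).filter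
    (fun c => decide (pvGetC g c.1 c.2 = '1' ∧
      (pvDirs.any fun d => pvGetC g (c.1 + d.1) (c.2 + d.2) = '0') = true)) with hrldef
  set g2 := rl.foldl (fun h c => pvSetC h c.1 c.2 '0') g with hg2def
  have hrlm : ∀ c : PvCell, c ∈ rl ↔ pvIntr H W c ∧ pvGetC g c.1 c.2 = '1' ∧
      (pvDirs.any fun d => pvGetC g (c.1 + d.1) (c.2 + d.2) = '0') = true := by
    intro c
    rw [hrldef, List.mem_filter, pvMem_cellsR, decide_eq_true_eq]
    constructor
    · rintro ⟨⟨a, b, cc, d⟩, h2⟩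
      exact ⟨⟨by omega, by omega, by omega, by omega⟩, h2⟩
    · rintro ⟨⟨a, b, cc, d⟩, h2⟩
      exact ⟨⟨by omega, by omega, by omega, by omega⟩, h2⟩
  have hrlbox : ∀ c ∈ rl, pvInB H W c := by
    intro c hc
    obtain ⟨⟨a, b, cc, d⟩, _⟩ := (hrlm c).mp hc
    exact ⟨by omega, by omega, by omega, by omega⟩
  have hshape2 : pvShape H W g2 := by
    rw [hg2def]
    exact pvShape_foldl_setC rl (fun _ => '0') g inv.shape
  have hg2get : ∀ d : PvCell, pvInB H W d →
      pvGetC g2 d.1 d.2 = if d ∈ rl then '0' else pvGetC g d.1 d.2 := by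
    intro d hd
    rw [hg2def]
    exact pvGetC_foldl_setC rl (fun _ => '0') g inv.shape hrlbox d hd
  have hrlreach : ∀ c ∈ rl, pvReach H W cont c := by
    intro c hcr
    obtain ⟨hintr, hchar, hany⟩ := (hrlm c).mp hcr
    have hc : pvInB H W c := by
      obtain ⟨a, b, cc, d⟩ := hintr
      exact ⟨by omega, by omega, by omega, by omega⟩
    obtain ⟨d, hd, hd0⟩ := List.any_eq_true.mp hany
    have hz0 : pvGetC g (c.1 + d.1) (c.2 + d.2) = '0' := of_decide_eq_true hd0
    have hdm : d = ((-1 : Int), (0 : Int)) ∨ d = (1, 0) ∨ d = (0, -1) ∨ d = (0, 1) := by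
      simpa [pvDirs] using hd
    have hnb : pvInB H W (c.1 + d.1, c.2 + d.2) := by
      obtain ⟨a1, a2, a3, a4⟩ := hintr
      have hd1 : -1 ≤ d.1 ∧ d.1 ≤ 1 ∧ -1 ≤ d.2 ∧ d.2 ≤ 1 := by
        rcases hdm with rfl | rfl | rfl | rfl <;>
          refine ⟨by norm_num, by norm_num, by norm_num, by norm_num⟩
      exact ⟨by omega, by omega, by omega, by omega⟩
    have haircont : cont.contains c = false := by
      rw [PySem.Dict.contains_eq_isSome_get?, inv.contI c hc,
        if_neg (fun hcontra => hcontra.2 hchar)]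
      rfl
    exact Relation.ReflTransGen.tail (hZ _ hnb hz0)
      ⟨pvNbrs_symm (by rw [pvNbrs_eq_map]; exact List.mem_map.mpr ⟨d, hd, rfl⟩), hc, haircont⟩
  set Z2 := (pvCellsR 0 (H + 2) 0 (W + 2)).filter
    (fun c => decide (pvGetC g2 c.1 c.2 = '0')) with hZ2def
  have hZ2mem : ∀ c : PvCell, c ∈ Z2 ↔ (pvInB H W c ∧ pvGetC g2 c.1 c.2 = '0') := by
    intro c
    rw [hZ2def, List.mem_filter, pvMem_cellsR, decide_eq_true_eq]
  have hring2 : ∀ c : PvCell, pvInB H W c → ¬ pvIntr H W c → pvGetC g2 c.1 c.2 = '0' := by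
    intro c hc hni
    rw [hg2get c hc]
    split
    · rfl
    · exact inv.ring c hc hni
  have hzv2 : ∀ c : PvCell, pvInB H W c →
      (pvGetC g2 c.1 c.2 = '0' ↔ (c ∈ Z2 ∨ decide (c = ((0 : Int), (0 : Int))) = true)) := by
    intro c hc
    constructor
    · intro h0
      exact Or.inl ((hZ2mem c).mpr ⟨hc, h0⟩)
    · rintro (hz | hv)
      · exact ((hZ2mem c).mp hz).2
      · have hc0 : c = ((0 : Int), (0 : Int)) := of_decide_eq_true hv
        subst hc0
        exact hring2 _ hc (fun hint => by
          obtain ⟨h1, _⟩ := hint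
          simp at h1)
  have hcI2 : ∀ c : PvCell, pvInB H W c → cont.get? c =
      (if pvGetC g2 c.1 c.2 ≠ '0' ∧ pvGetC g2 c.1 c.2 ≠ '1' then some (pvGetC g2 c.1 c.2) else none) := by
    intro c hc
    rw [hg2get c hc]
    by_cases hcr : c ∈ rl
    · rw [if_pos hcr, if_neg (show ¬ ('0' ≠ '0' ∧ '0' ≠ '1') by simp)]
      have hchar := ((hrlm c).mp hcr).2.1
      rw [inv.contI c hc, if_neg (fun hcontra => hcontra.2 hchar)]
    · rw [if_neg hcr]
      exact inv.contI c hc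
  have binv : PvBInv H W g2 cont Z2 (fun c => decide (c = ((0 : Int), (0 : Int))))
      (PySem.Set.add PySem.Set.empty ((0 : Int), (0 : Int))) :=
    ⟨hshape2, hring2, pvVisSeen0, hzv2, hcI2⟩
  unfold pvUpdateA
  have final := pvBfs_sim (zero := Z2) g2 (fun c => decide (c = ((0 : Int), (0 : Int))))
    [((0 : Int), (0 : Int))] _ binv
  constructor
  · refine ⟨final.shape, final.ring, ?_, final.contI, inv.keysInt, inv.keysNd⟩
    intro c hc
    rw [PySem.Set.mem_update, final.zeroVis c hc]
    constructor
    · rintro (hz | hv)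
      · have h20 := ((hZ2mem c).mp hz).2
        rw [hg2get c hc] at h20
        by_cases hcr : c ∈ rl
        · exact Or.inr ((pvSweep_iff_reach cont c).mpr (hrlreach c hcr))
        · rw [if_neg hcr] at h20
          exact Or.inl ((inv.zeroI c hc).mp h20)
      · exact Or.inr ((pvSweep_iff_reach cont c).mpr
          ((pvBfsB_iff_reach cont c).mp ((final.visSeen c).mp hv)))
    · rintro (hz | hs)
      · refine Or.inl ((hZ2mem c).mpr ⟨hc, ?_⟩)
        rw [hg2get c hc]
        split
        · rfl
        · exact (inv.zeroI c hc).mpr hz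
      · exact Or.inr ((final.visSeen c).mpr ((pvBfsB_iff_reach cont c).mpr
          ((pvSweep_iff_reach cont c).mp hs)))
  · intro c hc h0
    rcases (final.zeroVis c hc).mp h0 with hz | hv
    · have h20 := ((hZ2mem c).mp hz).2
      rw [hg2get c hc] at h20
      by_cases hcr : c ∈ rl
      · exact hrlreach c hcr
      · rw [if_neg hcr] at h20
        exact hZ c hc h20
    · exact (pvBfsB_iff_reach cont c).mp ((final.visSeen c).mp hv)

-- crane request '0' under a clean invariant: the sweep restores every cleared cell
set_option maxHeartbeats 1000000 in
theorem pvReq0_sim {H W : Int} (_hH : 0 ≤ H) (_hW : 0 ≤ W) {g : PvGrid}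
    {cont : PySem.Dict PvCell Char} {zero : PySem.Set PvCell} (inv : PvInv H W g cont zero)
    (hZ : pvZHalf H W g cont) (r : String) (rest : List Char) (hrl : r.toList = '0' :: rest)
    (hrest : ¬ rest.length = 0) :
    PvInv H W (pvStepReqA H W g r) (pvStepReqB H W (cont, zero) r).1
      (pvStepReqB H W (cont, zero) r).2 ∧
    pvZHalf H W (pvStepReqA H W g r) (pvStepReqB H W (cont, zero) r).1 := by
  unfold pvStepReqA pvStepReqB
  simp only [hrl]
  rw [if_neg hrest, if_neg hrest]
  dsimp only
  rw [pvNestedFoldl (f := fun (h : PvGrid) (c : PvCell) =>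
        if pvGetC h c.1 c.2 = '0' then pvSetC h c.1 c.2 '1' else h), pvCellsR_def]
  have hhitnil : cont.items.filter (fun p => p.2 == '0') = [] := by
    rw [List.filter_eq_nil_iff]
    intro p hp
    have hg? : cont.get? p.1 = some p.2 :=
      (PySem.Dict.get?_eq_some_iff_mem_items cont p.1 p.2 inv.keysNd).mpr hp
    have hintr := inv.keysInt p hp
    have hin : pvInB H W p.1 := by
      obtain ⟨a, b, cc, d⟩ := hintr
      exact ⟨by omega, by omega, by omega, by omega⟩
    have hcieq := inv.contI p.1 hin
    rw [hg?] at hcieq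
    have hne0 : p.2 ≠ '0' := by
      by_cases hcase : pvGetC g p.1.1 p.1.2 ≠ '0' ∧ pvGetC g p.1.1 p.1.2 ≠ '1'
      · rw [if_pos hcase] at hcieq
        rw [Option.some.inj hcieq]
        exact hcase.1
      · rw [if_neg hcase] at hcieq
        exact absurd hcieq (by simp)
    simp [hne0]
  rw [hhitnil]
  simp only [List.map_nil, PySem.Set.ofList_nil]
  rw [pvRebuild_nil cont inv.keysNd]
  set g2 := (pvCellsR 1 (H + 2 - 1) 1 (W + 2 - 1)).foldl
    (fun h c => if pvGetC h c.1 c.2 = '0' then pvSetC h c.1 c.2 '1' else h) g with hg2def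
  have hcellsbox : ∀ c ∈ pvCellsR 1 (H + 2 - 1) 1 (W + 2 - 1), pvInB H W c := by
    intro c hcm
    have := pvMem_cellsR.mp hcm
    exact ⟨by omega, by omega, by omega, by omega⟩
  have hshape2 : pvShape H W g2 := by
    rw [hg2def]
    exact pvShape_crane _ '0' g inv.shape
  have hg2get : ∀ d : PvCell, pvInB H W d → pvGetC g2 d.1 d.2
      = if d ∈ pvCellsR 1 (H + 2 - 1) 1 (W + 2 - 1) ∧ pvGetC g d.1 d.2 = '0' then '1'
        else pvGetC g d.1 d.2 := by
    intro d hd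
    rw [hg2def]
    exact pvGetC_crane _ '0' g inv.shape hcellsbox d hd
  set Z2 := (pvCellsR 0 (H + 2) 0 (W + 2)).filter
    (fun c => decide (pvGetC g2 c.1 c.2 = '0')) with hZ2def
  have hZ2mem : ∀ c : PvCell, c ∈ Z2 ↔ (pvInB H W c ∧ pvGetC g2 c.1 c.2 = '0') := by
    intro c
    rw [hZ2def, List.mem_filter, pvMem_cellsR, decide_eq_true_eq]
  have hringC : ∀ c : PvCell, pvInB H W c → ¬ pvIntr H W c → pvGetC g2 c.1 c.2 = '0' := by
    intro c hc hni
    rw [hg2get c hc, if_neg (fun hcond => hni (by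
      have := pvMem_cellsR.mp hcond.1
      exact ⟨by omega, by omega, by omega, by omega⟩))]
    exact inv.ring c hc hni
  have hzvC : ∀ c : PvCell, pvInB H W c →
      (pvGetC g2 c.1 c.2 = '0' ↔ (c ∈ Z2 ∨ decide (c = ((0 : Int), (0 : Int))) = true)) := by
    intro c hc
    constructor
    · intro h0
      exact Or.inl ((hZ2mem c).mpr ⟨hc, h0⟩)
    · rintro (hz | hv)
      · exact ((hZ2mem c).mp hz).2
      · have hc0 : c = ((0 : Int), (0 : Int)) := of_decide_eq_true hv
        subst hc0
        exact hringC _ hc (fun hint => by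
          obtain ⟨h1, _⟩ := hint
          simp at h1)
  have hcIC : ∀ c : PvCell, pvInB H W c → cont.get? c =
      (if pvGetC g2 c.1 c.2 ≠ '0' ∧ pvGetC g2 c.1 c.2 ≠ '1' then some (pvGetC g2 c.1 c.2) else none) := by
    intro c hc
    rw [hg2get c hc]
    by_cases hcond : c ∈ pvCellsR 1 (H + 2 - 1) 1 (W + 2 - 1) ∧ pvGetC g c.1 c.2 = '0'
    · rw [if_pos hcond, if_neg (show ¬ ('1' ≠ '0' ∧ '1' ≠ '1') by simp)]
      rw [inv.contI c hc, if_neg (fun hcontra => hcontra.1 hcond.2)]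
    · rw [if_neg hcond]
      exact inv.contI c hc
  have binv : PvBInv H W g2 cont Z2 (fun c => decide (c = ((0 : Int), (0 : Int))))
      (PySem.Set.add PySem.Set.empty ((0 : Int), (0 : Int))) :=
    ⟨hshape2, hringC, pvVisSeen0, hzvC, hcIC⟩
  unfold pvUpdateA
  have final := pvBfs_sim (zero := Z2) g2 (fun c => decide (c = ((0 : Int), (0 : Int))))
    [((0 : Int), (0 : Int))] _ binv
  constructor
  · refine ⟨final.shape, final.ring, ?_, final.contI, inv.keysInt, inv.keysNd⟩
    intro c hc
    rw [PySem.Set.mem_update, final.zeroVis c hc]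
    constructor
    · rintro (hz | hv)
      · have h20 := ((hZ2mem c).mp hz).2
        rw [hg2get c hc] at h20
        by_cases hcond : c ∈ pvCellsR 1 (H + 2 - 1) 1 (W + 2 - 1) ∧ pvGetC g c.1 c.2 = '0'
        · rw [if_pos hcond] at h20
          exact absurd h20 (by decide)
        · rw [if_neg hcond] at h20
          exact Or.inl ((inv.zeroI c hc).mp h20)
      · exact Or.inr ((pvSweep_iff_reach cont c).mpr
          ((pvBfsB_iff_reach cont c).mp ((final.visSeen c).mp hv)))
    · rintro (hz | hs)
      · exact Or.inr ((final.visSeen c).mpr ((pvBfsB_iff_reach cont c).mpr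
          (hZ c hc ((inv.zeroI c hc).mpr hz))))
      · exact Or.inr ((final.visSeen c).mpr ((pvBfsB_iff_reach cont c).mpr
          ((pvSweep_iff_reach cont c).mp hs)))
  · intro c hc h0
    rcases (final.zeroVis c hc).mp h0 with hz | hv
    · have h20 := ((hZ2mem c).mp hz).2
      rw [hg2get c hc] at h20
      by_cases hcond : c ∈ pvCellsR 1 (H + 2 - 1) 1 (W + 2 - 1) ∧ pvGetC g c.1 c.2 = '0'
      · rw [if_pos hcond] at h20
        exact absurd h20 (by decide)
      · rw [if_neg hcond] at h20
        exact hZ c hc h20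
    · exact (pvBfsB_iff_reach cont c).mp ((final.visSeen c).mp hv)

-- A's update() preserves the weak invariant (the flood only flips '1' cells to '0')
theorem pvInv2_update {H W : Int} {g : PvGrid} {cont : PySem.Dict PvCell Char}
    (i2 : PvInv2 H W g cont) : PvInv2 H W (pvUpdateA (H + 2) (W + 2) g).1 cont := by
  unfold pvUpdateA
  set Z2 := (pvCellsR 0 (H + 2) 0 (W + 2)).filter
    (fun c => decide (pvGetC g c.1 c.2 = '0')) with hZ2def
  have hZ2mem : ∀ c : PvCell, c ∈ Z2 ↔ (pvInB H W c ∧ pvGetC g c.1 c.2 = '0') := by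
    intro c
    rw [hZ2def, List.mem_filter, pvMem_cellsR, decide_eq_true_eq]
  have hzv : ∀ c : PvCell, pvInB H W c →
      (pvGetC g c.1 c.2 = '0' ↔ (c ∈ Z2 ∨ decide (c = ((0 : Int), (0 : Int))) = true)) := by
    intro c hc
    constructor
    · intro h0
      exact Or.inl ((hZ2mem c).mpr ⟨hc, h0⟩)
    · rintro (hz | hv)
      · exact ((hZ2mem c).mp hz).2
      · have hc0 : c = ((0 : Int), (0 : Int)) := of_decide_eq_true hv
        subst hc0
        exact i2.ring _ hc (fun hint => by
          obtain ⟨h1, _⟩ := hint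
          simp at h1)
  have binv : PvBInv H W g cont Z2 (fun c => decide (c = ((0 : Int), (0 : Int))))
      (PySem.Set.add PySem.Set.empty ((0 : Int), (0 : Int))) :=
    ⟨i2.shape, i2.ring, pvVisSeen0, hzv, i2.contI⟩
  have final := pvBfs_sim (zero := Z2) g (fun c => decide (c = ((0 : Int), (0 : Int))))
    [((0 : Int), (0 : Int))] _ binv
  exact ⟨final.shape, final.ring, final.contI, i2.keysInt, i2.keysNd⟩

-- once the encoding may have diverged, a forklift-'1' request and ANY crane request still
-- keep the two container states equal (neither ever touches a container the other keeps)
set_option maxHeartbeats 1000000 in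
theorem pvReq2_sim {H W : Int} {g : PvGrid} {cont : PySem.Dict PvCell Char}
    (i2 : PvInv2 H W g cont) (zero : PySem.Set PvCell) (r : String)
    (hne : r.toList ≠ []) (hok : r.toList.length ≠ 1 ∨ r.toList = ['1']) :
    PvInv2 H W (pvStepReqA H W g r) (pvStepReqB H W (cont, zero) r).1 := by
  have hI2B : ∀ c : PvCell, pvIntr H W c → pvInB H W c := by
    rintro c ⟨a, b, cc, d⟩
    exact ⟨by omega, by omega, by omega, by omega⟩
  have hintrGet : ∀ (c : PvCell) (v : Char), cont.get? c = some v → pvIntr H W c :=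
    fun c v h =>
      i2.keysInt (c, v) ((PySem.Dict.get?_eq_some_iff_mem_items cont c v i2.keysNd).mp h)
  unfold pvStepReqA pvStepReqB
  rcases hrl : r.toList with _ | ⟨t, rest⟩
  · exact absurd hrl hne
  · simp only [hrl]
    by_cases hfork : rest.length = 0
    · -- the forklift request must be '1'
      have h1 : t = '1' ∧ rest = [] := by
        rcases hok with hlen | hone
        · exfalso
          rw [hrl] at hlen
          simp [List.length_eq_zero_iff.mp hfork] at hlen
        · rw [hrl] at hone
          injection hone with ht hrest
          exact ⟨ht, hrest⟩
      obtain ⟨ht, hrest⟩ := h1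
      subst ht
      subst hrest
      rw [if_pos (show ([] : List Char).length = 0 from rfl),
        if_pos (show ([] : List Char).length = 0 from rfl)]
      dsimp only
      rw [pvNestedFoldl (f := fun (acc : List PvCell) (c : PvCell) =>
            if pvGetC g c.1 c.2 = '1' ∧ pvDirs.any (fun d => pvGetC g (c.1 + d.1) (c.2 + d.2) = '0')
            then acc ++ [c] else acc),
          pvCellsR_def, PySem.List.foldl_append_ite_eq_filter, List.nil_append]
      have hhitnil : cont.items.filter (fun p =>
          p.2 == '1' && (pvNbrs p.1).any (fun n => PySem.Set.contains zero n)) = [] := by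
        rw [List.filter_eq_nil_iff]
        intro p hp
        have hg? : cont.get? p.1 = some p.2 :=
          (PySem.Dict.get?_eq_some_iff_mem_items cont p.1 p.2 i2.keysNd).mpr hp
        have hintr := i2.keysInt p hp
        have hin : pvInB H W p.1 := hI2B p.1 hintr
        have hcieq := i2.contI p.1 hin
        rw [hg?] at hcieq
        have hne1 : p.2 ≠ '1' := by
          by_cases hcase : pvGetC g p.1.1 p.1.2 ≠ '0' ∧ pvGetC g p.1.1 p.1.2 ≠ '1'
          · rw [if_pos hcase] at hcieq
            rw [Option.some.inj hcieq]
            exact hcase.2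
          · rw [if_neg hcase] at hcieq
            exact absurd hcieq (by simp)
        simp [hne1]
      rw [hhitnil]
      simp only [List.map_nil, PySem.Set.ofList_nil, PySem.Set.update_nil]
      rw [pvRebuild_nil cont i2.keysNd]
      set rl := (pvCellsR 1 (H + 2 - 1) 1 (W + 2 - 1)).filter
        (fun c => decide (pvGetC g c.1 c.2 = '1' ∧
          (pvDirs.any fun d => pvGetC g (c.1 + d.1) (c.2 + d.2) = '0') = true)) with hrldef
      set g2 := rl.foldl (fun h c => pvSetC h c.1 c.2 '0') g with hg2def
      have hrlm : ∀ c : PvCell, c ∈ rl ↔ pvIntr H W c ∧ pvGetC g c.1 c.2 = '1' ∧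
          (pvDirs.any fun d => pvGetC g (c.1 + d.1) (c.2 + d.2) = '0') = true := by
        intro c
        rw [hrldef, List.mem_filter, pvMem_cellsR, decide_eq_true_eq]
        constructor
        · rintro ⟨⟨a, b, cc, d⟩, h2⟩
          exact ⟨⟨by omega, by omega, by omega, by omega⟩, h2⟩
        · rintro ⟨⟨a, b, cc, d⟩, h2⟩
          exact ⟨⟨by omega, by omega, by omega, by omega⟩, h2⟩
      have hrlbox : ∀ c ∈ rl, pvInB H W c := fun c hc => hI2B c ((hrlm c).mp hc).1
      have hshape2 : pvShape H W g2 := by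
        rw [hg2def]
        exact pvShape_foldl_setC rl (fun _ => '0') g i2.shape
      have hg2get : ∀ d : PvCell, pvInB H W d →
          pvGetC g2 d.1 d.2 = if d ∈ rl then '0' else pvGetC g d.1 d.2 := by
        intro d hd
        rw [hg2def]
        exact pvGetC_foldl_setC rl (fun _ => '0') g i2.shape hrlbox d hd
      have i2g2 : PvInv2 H W g2 cont := by
        refine ⟨hshape2, ?_, ?_, i2.keysInt, i2.keysNd⟩
        · intro c hc hni
          rw [hg2get c hc]
          split
          · rfl
          · exact i2.ring c hc hni
        · intro c hc
          rw [hg2get c hc]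
          by_cases hcr : c ∈ rl
          · rw [if_pos hcr, if_neg (show ¬ ('0' ≠ '0' ∧ '0' ≠ '1') by simp)]
            have hchar := ((hrlm c).mp hcr).2.1
            rw [i2.contI c hc, if_neg (fun hcontra => hcontra.2 hchar)]
          · rw [if_neg hcr]
            exact i2.contI c hc
      exact pvInv2_update i2g2
    · -- crane request with ANY target letter, including the sentinels
      rw [if_neg hfork, if_neg hfork]
      dsimp only
      rw [pvNestedFoldl (f := fun (h : PvGrid) (c : PvCell) =>
            if pvGetC h c.1 c.2 = t then pvSetC h c.1 c.2 '1' else h), pvCellsR_def]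
      set hit := ((cont.items.filter (fun p => p.2 == t)).map (·.1)) with hhitdef
      set gone := PySem.Set.ofList hit with hgonedef
      set cont' := (cont.items.filter (fun p => !(PySem.Set.contains gone p.1))).foldl
        (fun d p => d.insert p.1 p.2) PySem.Dict.empty with hcontdef
      set g2 := (pvCellsR 1 (H + 2 - 1) 1 (W + 2 - 1)).foldl
        (fun h c => if pvGetC h c.1 c.2 = t then pvSetC h c.1 c.2 '1' else h) g with hg2def
      have hcellsbox : ∀ c ∈ pvCellsR 1 (H + 2 - 1) 1 (W + 2 - 1), pvInB H W c := by
        intro c hcm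
        have := pvMem_cellsR.mp hcm
        exact ⟨by omega, by omega, by omega, by omega⟩
      have hshape2 : pvShape H W g2 := by
        rw [hg2def]
        exact pvShape_crane _ t g i2.shape
      have hg2get : ∀ d : PvCell, pvInB H W d → pvGetC g2 d.1 d.2
          = if d ∈ pvCellsR 1 (H + 2 - 1) 1 (W + 2 - 1) ∧ pvGetC g d.1 d.2 = t then '1'
            else pvGetC g d.1 d.2 := by
        intro d hd
        rw [hg2def]
        exact pvGetC_crane _ t g i2.shape hcellsbox d hd
      have hhitm : ∀ c : PvCell, c ∈ hit ↔ cont.get? c = some t := by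
        intro c
        rw [hhitdef]
        constructor
        · intro hc
          obtain ⟨p, hpf, hpc⟩ := List.mem_map.mp hc
          obtain ⟨hpi, hpP⟩ := List.mem_filter.mp hpf
          have hpt : p.2 = t := by simpa using hpP
          have hp : p = (c, t) := Prod.ext hpc hpt
          rw [hp] at hpi
          exact (PySem.Dict.get?_eq_some_iff_mem_items cont c t i2.keysNd).mpr hpi
        · intro hg?
          exact List.mem_map.mpr ⟨(c, t),
            List.mem_filter.mpr
              ⟨(PySem.Dict.get?_eq_some_iff_mem_items cont c t i2.keysNd).mp hg?, by simp⟩, rfl⟩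
      have hgone : ∀ x : PvCell, x ∈ gone ↔ x ∈ hit := by
        intro x
        rw [hgonedef]
        exact PySem.Set.mem_ofList hit x
      have hcg : ∀ x : PvCell, cont'.get? x = if x ∈ hit then none else cont.get? x := by
        intro x
        rw [hcontdef, pvRebuild_get? cont gone i2.keysNd x]
        by_cases hx : x ∈ hit
        · rw [if_pos ((hgone x).mpr hx), if_pos hx]
        · rw [if_neg (fun hmem => hx ((hgone x).mp hmem)), if_neg hx]
      have hki' : ∀ p ∈ cont'.items, pvIntr H W p.1 := by
        intro p hp
        rw [hcontdef, pvRebuild_items cont gone i2.keysNd] at hp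
        exact i2.keysInt p (List.mem_filter.mp hp).1
      have hkn' : cont'.keys.Nodup := by
        rw [hcontdef]
        exact pvRebuild_keys_nodup cont gone i2.keysNd
      have i2g2 : PvInv2 H W g2 cont' := by
        refine ⟨hshape2, ?_, ?_, hki', hkn'⟩
        · intro c hc hni
          rw [hg2get c hc, if_neg (fun hcond => hni (by
            have := pvMem_cellsR.mp hcond.1
            exact ⟨by omega, by omega, by omega, by omega⟩))]
          exact i2.ring c hc hni
        · intro c hc
          rw [hcg c, hg2get c hc]
          by_cases hcond : c ∈ pvCellsR 1 (H + 2 - 1) 1 (W + 2 - 1) ∧ pvGetC g c.1 c.2 = t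
          · rw [if_pos hcond, if_neg (show ¬ ('1' ≠ '0' ∧ '1' ≠ '1') by simp)]
            by_cases hch : c ∈ hit
            · rw [if_pos hch]
            · rw [if_neg hch]
              by_cases hPt : pvGetC g c.1 c.2 ≠ '0' ∧ pvGetC g c.1 c.2 ≠ '1'
              · exact absurd ((hhitm c).mpr (by
                  rw [i2.contI c hc, if_pos hPt, hcond.2])) hch
              · rw [i2.contI c hc, if_neg hPt]
          · rw [if_neg hcond]
            have hch : ¬ c ∈ hit := by
              intro hch
              have hg? := (hhitm c).mp hch
              have hcieq := i2.contI c hc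
              rw [hg?] at hcieq
              by_cases hcase : pvGetC g c.1 c.2 ≠ '0' ∧ pvGetC g c.1 c.2 ≠ '1'
              · rw [if_pos hcase] at hcieq
                have hintr := hintrGet c t hg?
                refine hcond ⟨pvMem_cellsR.mpr (by
                  obtain ⟨a, b, cc, d⟩ := hintr
                  exact ⟨by omega, by omega, by omega, by omega⟩), (Option.some.inj hcieq).symm⟩
              · rw [if_neg hcase] at hcieq
                exact absurd hcieq (by simp)
            rw [if_neg hch]
            exact i2.contI c hc
      exact pvInv2_update i2g2

theorem pvReqClean_sim {H W : Int} (hH : 0 ≤ H) (hW : 0 ≤ W) {g : PvGrid}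
    {cont : PySem.Dict PvCell Char} {zero : PySem.Set PvCell} (inv : PvInv H W g cont zero)
    (hZ : pvZHalf H W g cont) (r : String) (hne : r.toList ≠ []) :
    PvInv H W (pvStepReqA H W g r) (pvStepReqB H W (cont, zero) r).1
      (pvStepReqB H W (cont, zero) r).2 ∧
    pvZHalf H W (pvStepReqA H W g r) (pvStepReqB H W (cont, zero) r).1 := by
  rcases hrl : r.toList with _ | ⟨t, rest⟩
  · exact absurd hrl hne
  · by_cases hf : rest.length = 0
    · by_cases ht : t = '1'
      · exact pvReq1_sim hH hW inv hZ r (by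
          rw [hrl, ht, List.eq_nil_iff_length_eq_zero.mpr hf])
      · have h := pvReq_sim hH hW inv r ⟨hne,
          fun hcon => ht (by rw [hrl] at hcon; simpa using hcon.2),
          fun hcon => hcon.1 (by rw [hrl]; simp [hf])⟩
        exact ⟨h.1, h.2 hZ⟩
    · by_cases ht : t = '0'
      · exact pvReq0_sim hH hW inv hZ r rest (by rw [hrl, ht]) hf
      · have h := pvReq_sim hH hW inv r ⟨hne,
          fun hcon => hf (by
            rw [hrl] at hcon
            have := hcon.1
            simpa using this),
          fun hcon => ht (by rw [hrl] at hcon; simpa using hcon.2)⟩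
        exact ⟨h.1, h.2 hZ⟩

-- the initial grid's characters (for the clean branch)
theorem pvInitChar (storage : List String) (d : PvCell)
    (hd : pvInB (storage.length : Int) (PySem.Str.len (storage.getD 0 "")) d) :
    pvGetC ((PySem.List.pyRange 1 ((storage.length : Int) + 2 - 1) 1).foldl (fun g i =>
        (PySem.List.pyRange 1 (PySem.Str.len (storage.getD 0 "") + 2 - 1) 1).foldl (fun g j =>
          pvSetC g i j (pvStorChar storage i j)) g)
        (List.replicate ((storage.length : Int) + 2).toNat
          (List.replicate (PySem.Str.len (storage.getD 0 "") + 2).toNat '0'))) d.1 d.2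
      = if d ∈ pvCellsR 1 ((storage.length : Int) + 2 - 1) 1 (PySem.Str.len (storage.getD 0 "") + 2 - 1)
        then pvStorChar storage d.1 d.2 else '0' := by
  set H := (storage.length : Int) with hH
  set W := PySem.Str.len (storage.getD 0 "") with hWdef
  have hHnn : 0 ≤ H := by rw [hH]; exact Int.natCast_nonneg _
  have hWnn : 0 ≤ W := by rw [hWdef, PySem.Str.len_eq]; exact Int.natCast_nonneg _
  rw [pvNestedFoldl (f := fun (g : PvGrid) (c : PvCell) =>
    pvSetC g c.1 c.2 (pvStorChar storage c.1 c.2))]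
  simp only [pvCellsR_def]
  have hshape0 : pvShape H W (List.replicate (H + 2).toNat (List.replicate (W + 2).toNat '0')) := by
    refine ⟨List.length_replicate, fun row hr => ?_⟩
    rw [List.eq_of_mem_replicate hr]
    exact List.length_replicate
  have hcellsbox : ∀ c ∈ pvCellsR 1 (H + 2 - 1) 1 (W + 2 - 1), pvInB H W c := by
    intro c hc
    have := pvMem_cellsR.mp hc
    exact ⟨by omega, by omega, by omega, by omega⟩
  rw [pvGetC_foldl_setC (pvCellsR 1 (H + 2 - 1) 1 (W + 2 - 1))
    (fun c => pvStorChar storage c.1 c.2) _ hshape0 hcellsbox d hd]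
  split
  · rfl
  · unfold pvGetC
    rw [List.getD_eq_getElem _ [] (by rw [List.length_replicate]; obtain ⟨a, b, cc, dd⟩ := hd; omega),
      List.getElem_replicate,
      List.getD_eq_getElem _ '*' (by rw [List.length_replicate]; obtain ⟨a, b, cc, dd⟩ := hd; omega),
      List.getElem_replicate]

-- final count
theorem pvCount_eq {H W : Int} {g : PvGrid} {cont : PySem.Dict PvCell Char}
    (inv : PvInv2 H W g cont) :
    (PySem.List.pyRange 1 (H + 2 - 1) 1).foldl (fun a i =>
      (PySem.List.pyRange 1 (W + 2 - 1) 1).foldl (fun a j =>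
        if pvGetC g i j ≠ '0' ∧ pvGetC g i j ≠ '1' then a + 1 else a) a) (0 : Int)
      = (cont.size : Int) := by
  rw [pvNestedFoldl (f := fun (a : Int) (c : PvCell) =>
    if pvGetC g c.1 c.2 ≠ '0' ∧ pvGetC g c.1 c.2 ≠ '1' then a + 1 else a)]
  rw [PySem.List.foldl_ite_add_one, zero_add]
  have hperm : ((pvCellsR 1 (H + 2 - 1) 1 (W + 2 - 1)).filter
      (fun c => decide (pvGetC g c.1 c.2 ≠ '0' ∧ pvGetC g c.1 c.2 ≠ '1'))).Perm cont.keys := by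
    rw [List.perm_ext_iff_of_nodup ((pvNodup_cellsR ..).filter _) inv.keysNd]
    intro x
    rw [List.mem_filter, pvMem_cellsR]
    constructor
    · rintro ⟨⟨hx1, hx2, hx3, hx4⟩, hP⟩
      simp only [decide_eq_true_eq] at hP
      have hin : pvInB H W x := ⟨by omega, by omega, by omega, by omega⟩
      have hg := inv.contI x hin
      rw [if_pos hP] at hg
      have hne : cont.get? x ≠ none := by rw [hg]; simp
      by_contra h
      exact hne ((PySem.Dict.get?_eq_none_iff_not_mem_keys cont x).mpr h)
    · intro hx
      obtain ⟨p, hp, hpk⟩ := List.mem_map.mp (by simpa only [PySem.Dict.keys] using hx)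
      have hintx : pvIntr H W x := hpk ▸ inv.keysInt p hp
      obtain ⟨ha, hbb, hcc, hdd⟩ := hintx
      have hin : pvInB H W x := ⟨by omega, by omega, by omega, by omega⟩
      have hg := inv.contI x hin
      have hne : cont.get? x ≠ none :=
        fun h => ((PySem.Dict.get?_eq_none_iff_not_mem_keys cont x).mp h) hx
      rw [hg] at hne
      by_cases hP : pvGetC g x.1 x.2 ≠ '0' ∧ pvGetC g x.1 x.2 ≠ '1'
      · exact ⟨⟨by omega, by omega, by omega, by omega⟩, by simpa using hP⟩
      · rw [if_neg hP] at hne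
        exact absurd rfl hne
  have hlen := hperm.length_eq
  rw [List.countP_eq_length_filter]
  have hks : cont.keys.length = cont.size := by
    simp [PySem.Dict.keys, PySem.Dict.size]
  simp only [pvCellsR] at hlen
  omega

set_option maxHeartbeats 2000000 in
theorem solution_eq_alt (storage requests : List String)
    (hpre : Pre_solution storage requests) :
    solution storage requests = solution_alt storage requests := by
  obtain ⟨hp1, hp2, hp3, hp4⟩ := hpre
  have hH : (0 : Int) ≤ (storage.length : Int) := Int.natCast_nonneg _
  have hW : (0 : Int) ≤ PySem.Str.len (storage.getD 0 "") := by
    rw [PySem.Str.len_eq]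
    exact Int.natCast_nonneg _
  rcases hp4 with hcleanb | hbenign
  · -- clean storage: every request is admissible
    have hclean : ∀ s ∈ storage, ∀ ch ∈ s.toList, ch ≠ '0' := by
      simpa [List.all_eq_true, bne_iff_ne] using hcleanb
    have hfoldC : ∀ (rs : List String), (∀ r ∈ rs, r.toList ≠ []) →
        ∀ (g : PvGrid) (cont : PySem.Dict PvCell Char) (zero : PySem.Set PvCell),
        PvInv (storage.length : Int) (PySem.Str.len (storage.getD 0 "")) g cont zero ∧
          pvZHalf (storage.length : Int) (PySem.Str.len (storage.getD 0 "")) g cont →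
        PvInv (storage.length : Int) (PySem.Str.len (storage.getD 0 ""))
          (rs.foldl (pvStepReqA (storage.length : Int) (PySem.Str.len (storage.getD 0 ""))) g)
          ((rs.foldl (pvStepReqB (storage.length : Int) (PySem.Str.len (storage.getD 0 "")))
            (cont, zero)).1)
          ((rs.foldl (pvStepReqB (storage.length : Int) (PySem.Str.len (storage.getD 0 "")))
            (cont, zero)).2) ∧
        pvZHalf (storage.length : Int) (PySem.Str.len (storage.getD 0 ""))
          (rs.foldl (pvStepReqA (storage.length : Int) (PySem.Str.len (storage.getD 0 ""))) g)
          ((rs.foldl (pvStepReqB (storage.length : Int) (PySem.Str.len (storage.getD 0 "")))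
            (cont, zero)).1) := by
      intro rs
      induction rs with
      | nil => exact fun _ g cont zero i => i
      | cons r rs ih =>
        intro hall g cont zero i
        rw [List.foldl_cons, List.foldl_cons]
        exact ih (fun x hx => hall x (List.mem_cons_of_mem _ hx)) _ _ _
          (pvReqClean_sim hH hW i.1 i.2 r (hall r (List.mem_cons.mpr (Or.inl rfl))))
    have hinit := pvInit_sim storage
    have hZ0 : pvZHalf (storage.length : Int) (PySem.Str.len (storage.getD 0 ""))
        ((PySem.List.pyRange 1 ((storage.length : Int) + 2 - 1) 1).foldl (fun g i =>
          (PySem.List.pyRange 1 (PySem.Str.len (storage.getD 0 "") + 2 - 1) 1).foldl (fun g j =>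
            pvSetC g i j (pvStorChar storage i j)) g)
          (List.replicate ((storage.length : Int) + 2).toNat
            (List.replicate (PySem.Str.len (storage.getD 0 "") + 2).toNat '0')))
        (((PySem.List.pyRange 0 (storage.length : Int) 1).flatMap (fun i =>
            (PySem.List.pyRange 0 (PySem.Str.len (storage.getD 0 "")) 1).map (fun j => ((i, j) : PvCell)))).foldl
          (fun d c =>
            if pvStorChar storage (c.1 + 1) (c.2 + 1) ≠ '0' ∧
                pvStorChar storage (c.1 + 1) (c.2 + 1) ≠ '1'
            then d.insert (c.1 + 1, c.2 + 1) (pvStorChar storage (c.1 + 1) (c.2 + 1)) else d)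
          PySem.Dict.empty) := by
      intro c hc h0
      refine pvReach_ring hH hW (pvRingAir hinit) c hc ?_
      intro hint
      have hm : c ∈ pvCellsR 1 ((storage.length : Int) + 2 - 1) 1
          (PySem.Str.len (storage.getD 0 "") + 2 - 1) := by
        obtain ⟨a, b, cc, d⟩ := hint
        exact pvMem_cellsR.mpr ⟨by omega, by omega, by omega, by omega⟩
      rw [pvInitChar storage c hc, if_pos hm] at h0
      exact pvStorChar_no0 hclean _ _ h0
    exact pvCount_eq (pvInv_to2 (hfoldC requests hp3 _ _ _ ⟨hinit, hZ0⟩).1)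
  · -- after any sentinel-targeting request only multi-letter (crane) requests remain
    have hfold2 : ∀ (rs : List String), (∀ r ∈ rs, r.toList ≠ []) →
        (∀ r ∈ rs, r.toList.length ≠ 1) →
        ∀ (g : PvGrid) (st : PySem.Dict PvCell Char × PySem.Set PvCell),
        PvInv2 (storage.length : Int) (PySem.Str.len (storage.getD 0 "")) g st.1 →
        PvInv2 (storage.length : Int) (PySem.Str.len (storage.getD 0 ""))
          (rs.foldl (pvStepReqA (storage.length : Int) (PySem.Str.len (storage.getD 0 ""))) g)
          ((rs.foldl (pvStepReqB (storage.length : Int) (PySem.Str.len (storage.getD 0 ""))) st).1) := by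
      intro rs
      induction rs with
      | nil => exact fun _ _ g st i => i
      | cons r rs ih =>
        rintro hall hlen g ⟨cont, zero⟩ i
        rw [List.foldl_cons, List.foldl_cons]
        exact ih (fun x hx => hall x (List.mem_cons_of_mem _ hx))
          (fun x hx => hlen x (List.mem_cons_of_mem _ hx)) _ _
          (pvReq2_sim i zero r (hall r (List.mem_cons.mpr (Or.inl rfl)))
            (Or.inl (hlen r (List.mem_cons.mpr (Or.inl rfl)))))
    have hfold : ∀ (rs : List String), (∀ r ∈ rs, r.toList ≠ []) →
        List.Pairwise (fun a b => ((a.toList.length = 1 ∧ a.toList.headD ' ' = '1') ∨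
          (a.toList.length ≠ 1 ∧ a.toList.headD ' ' = '0')) → b.toList.length ≠ 1) rs →
        ∀ (g : PvGrid) (cont : PySem.Dict PvCell Char) (zero : PySem.Set PvCell),
        PvInv (storage.length : Int) (PySem.Str.len (storage.getD 0 "")) g cont zero →
        PvInv2 (storage.length : Int) (PySem.Str.len (storage.getD 0 ""))
          (rs.foldl (pvStepReqA (storage.length : Int) (PySem.Str.len (storage.getD 0 ""))) g)
          ((rs.foldl (pvStepReqB (storage.length : Int) (PySem.Str.len (storage.getD 0 "")))
            (cont, zero)).1) := by
      intro rs
      induction rs with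
      | nil => exact fun _ _ g cont zero i => pvInv_to2 i
      | cons r rs ih =>
        intro hall hpw g cont zero i
        obtain ⟨hhead, htail⟩ := List.pairwise_cons.mp hpw
        rw [List.foldl_cons, List.foldl_cons]
        by_cases hbad : (r.toList.length = 1 ∧ r.toList.headD ' ' = '1') ∨
            (r.toList.length ≠ 1 ∧ r.toList.headD ' ' = '0')
        · have hok : r.toList.length ≠ 1 ∨ r.toList = ['1'] := by
            rcases hbad with ⟨h1, h2⟩ | ⟨h1, _⟩
            · right
              rcases hx : r.toList with _ | ⟨c, cs⟩
              · rw [hx] at h1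
                simp at h1
              · rw [hx] at h1 h2
                have hcs : cs = [] := by
                  rw [List.length_cons] at h1
                  exact List.eq_nil_iff_length_eq_zero.mpr (by omega)
                have hc : c = '1' := by simpa using h2
                rw [hc, hcs]
            · exact Or.inl h1
          exact hfold2 rs (fun x hx => hall x (List.mem_cons_of_mem _ hx))
            (fun x hx => hhead x hx hbad) _ _
            (pvReq2_sim (pvInv_to2 i) zero r (hall r (List.mem_cons.mpr (Or.inl rfl))) hok)
        · rw [not_or] at hbad
          exact ih (fun x hx => hall x (List.mem_cons_of_mem _ hx)) htail _ _ _
            (pvReq_sim hH hW i r ⟨hall r (List.mem_cons.mpr (Or.inl rfl)), hbad.1, hbad.2⟩).1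
    exact pvCount_eq (hfold requests hp3 hbenign _ _ _ (pvInit_sim storage))

-- ===== VERDICT (by name: the statement is the Claim_ definition above) =====
theorem solution_spec : Claim_equal_solution := by
  intro storage requests _ hpre
  unfold Spec_solution
  exact solution_eq_alt storage requests hpre
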